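-- pv_equiv track=rewrite | github.com/raven-black-dream/Udacity-DS-Projects | PycharmProjects/Robbins-Plate-Sort/LP_Sort.py | lp_process
-- ===== SOURCE A (Python) =====
-- from collections import Counter
--
-- def lp_process(data):
--     final_data = {}
--     keys = sorted(data.keys())
--     count = Counter(data[keys[len(keys) - 1]])
--     plates_count = {}
--     for plate in count:
--         plates_count[plate] = {'count': count[plate]}
--         plates_count[plate]['scans'] = []
--         if 1 not in plates_count[plate]['scans']:
--             plates_count[plate]['scans'].append(1)
--     scan_num = 2
--     for i in range(len(keys) - 2, -1, -1):
--         temp_count = Counter(data[keys[i]])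
--
--         for plate in temp_count:
--             if plate in plates_count:
--                 plates_count[plate]['count'] += 1
--                 if scan_num not in plates_count[plate]['scans']:
--                     plates_count[plate]['scans'].append(scan_num)
--             else:
--                 plates_count[plate] = {'count': 1}
--                 plates_count[plate]['scans'] = []
--                 plates_count[plate]['scans'].append(scan_num)
--         scan_num += 1
--
--     final_data['first_time'] = []
--     final_data['not_present_in_1'] = []
--     final_data['not_present_in_2'] = []
--     final_data['not_present_in_3'] = []
--     final_data['not_present_in_4'] = []
--     final_data['not_present_in_5'] = []
--     final_data['not_present_in_6'] = []
--     final_data['not_present_in_7'] = []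
--     final_data['present_in_all'] = []
--     for plate in plates_count:
--         lst = plates_count[plate]['scans']
--         if len(lst) == len(keys):
--             final_data['present_in_all'].append(plate)
--         elif len(lst) == 1 and 1 in lst:
--             final_data['first_time'].append(plate)
--         elif 2 in lst and sorted(lst).index(2) == 0:
--             final_data['not_present_in_1'].append(plate)
--         elif 3 in lst and sorted(lst).index(3) == 0:
--             final_data['not_present_in_2'].append(plate)
--         elif 4 in lst and sorted(lst).index(4) == 0:
--             final_data['not_present_in_3'].append(plate)
--         elif 5 in lst and sorted(lst).index(5) == 0:
--             final_data['not_present_in_4'].append(plate)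
--         elif 6 in lst and sorted(lst).index(6) == 0:
--             final_data['not_present_in_5'].append(plate)
--         elif 7 in lst and sorted(lst).index(7) == 0:
--             final_data['not_present_in_6'].append(plate)
--         elif 8 in lst and sorted(lst).index(8) == 0:
--             final_data['not_present_in_7'].append(plate)
--     for datum in final_data:
--         final_data[datum] = sorted(final_data[datum])
--     return final_data
-- ===== SOURCE B (Python) =====
-- def lp_process(data):
--     keys_desc = sorted(data, reverse=True)
--     # scan j (1-based) holds the plates under the j-th largest key; touch the max key first
--     s0 = set(data[keys_desc[0]])
--     rest = [set(data[k]) for k in keys_desc[1:]]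
--     scan_sets = [s0] + rest
--     inter_all = s0
--     for s in rest:
--         inter_all = inter_all & s
--     first_time = s0.difference(inter_all, *rest)
--     prefix_unions = [set(s0)]
--     for s in rest[:7]:
--         prefix_unions.append(prefix_unions[-1] | s)
--     result = {'first_time': sorted(first_time)}
--     for i in range(1, 8):
--         if i < len(scan_sets):
--             result['not_present_in_%d' % i] = sorted(scan_sets[i] - prefix_unions[i - 1])
--         else:
--             result['not_present_in_%d' % i] = []
--     result['present_in_all'] = sorted(inter_all)
--     return result
-- ===== Notes on version B (the rewrite author's own statement) =====
-- stated objective: faster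
-- what changed: Replaces A's per-plate accumulation (a dict mapping each plate to a count and a growing scan-number list, then a nine-branch elif classification with a sorted() call per plate) by set algebra on the per-scan plate sets: present_in_all is the intersection of all scans, first_time is scan 1 minus the later scans and the intersection, and not_present_in_i is scan i+1 minus the prefix union of scans 1..i (only the 7 needed prefix unions are built).
import Mathlib
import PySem

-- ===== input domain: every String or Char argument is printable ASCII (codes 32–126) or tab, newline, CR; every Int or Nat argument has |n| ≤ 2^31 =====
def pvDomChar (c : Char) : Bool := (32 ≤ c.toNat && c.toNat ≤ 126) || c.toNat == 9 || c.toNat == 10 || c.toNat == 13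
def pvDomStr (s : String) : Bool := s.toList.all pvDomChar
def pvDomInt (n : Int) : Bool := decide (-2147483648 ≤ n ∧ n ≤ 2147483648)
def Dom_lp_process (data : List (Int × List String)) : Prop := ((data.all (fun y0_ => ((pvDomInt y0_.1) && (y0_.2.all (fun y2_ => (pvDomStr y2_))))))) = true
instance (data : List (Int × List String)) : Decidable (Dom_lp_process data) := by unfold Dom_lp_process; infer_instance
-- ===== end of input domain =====

-- B replaces A's per-plate scan-list accumulation (a dict of counters and scan lists, then a 9-way
-- elif classification with a sorted() call per plate) by set algebra over the per-scan plate sets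
-- (intersection, difference against the 7 needed prefix unions); objective: faster (measured).


-- ===== PORT A =====
-- The inner Python dict {'count': …, 'scans': …} has two fixed keys and is ported as the pair
-- (count, scans); 'plates_count[plate] = {'count': c}' followed by "['scans'] = []" becomes one
-- insert of (c, []).
def lp_process (data : List (Int × List String)) : List (String × List String) :=
  let d : PySem.Dict Int (List String) := PySem.Dict.mk data
  let keys := PySem.List.sorted d.keys (fun x => x) false
  let count : PySem.Dict String Int :=
    PySem.Dict.counter (d.getD (PySem.List.pyGetD keys ((keys.length : Int) - 1) 0) [])
  let platesCount : PySem.Dict String (Int × List Int) :=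
    count.keys.foldl (fun pc plate =>
      let pc := pc.insert plate (count.getD plate 0, ([] : List Int))
      if (1 : Int) ∈ (pc.getD plate (0, [])).2 then pc
      else pc.modify plate (0, []) (fun cv => (cv.1, cv.2 ++ [1]))) PySem.Dict.empty
  let st := (PySem.List.pyRange ((keys.length : Int) - 2) (-1) (-1)).foldl
    (fun (st : PySem.Dict String (Int × List Int) × Int) i =>
      let tempCount : PySem.Dict String Int :=
        PySem.Dict.counter (d.getD (PySem.List.pyGetD keys i 0) [])
      let pc := tempCount.keys.foldl (fun pc plate =>
        if pc.contains plate then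
          let pc := pc.modify plate (0, []) (fun cv => (cv.1 + 1, cv.2))
          if st.2 ∈ (pc.getD plate (0, [])).2 then pc
          else pc.modify plate (0, []) (fun cv => (cv.1, cv.2 ++ [st.2]))
        else
          let pc := pc.insert plate (1, ([] : List Int))
          pc.modify plate (0, []) (fun cv => (cv.1, cv.2 ++ [st.2]))) st.1
      (pc, st.2 + 1)) (platesCount, 2)
  let platesCount := st.1
  let fd : PySem.Dict String (List String) :=
    ((((((((((PySem.Dict.empty).insert "first_time" []).insert "not_present_in_1" []).insert
      "not_present_in_2" []).insert "not_present_in_3" []).insert "not_present_in_4" []).insert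
      "not_present_in_5" []).insert "not_present_in_6" []).insert "not_present_in_7" []).insert
      "present_in_all" [])
  let fd := platesCount.keys.foldl (fun fd plate =>
    let lst := (platesCount.getD plate (0, ([] : List Int))).2
    if lst.length = keys.length then fd.modify "present_in_all" [] (· ++ [plate])
    else if lst.length = 1 ∧ (1 : Int) ∈ lst then fd.modify "first_time" [] (· ++ [plate])
    else if (2 : Int) ∈ lst ∧ PySem.List.index? (PySem.List.sorted lst (fun x => x) false) 2 = some 0 then
      fd.modify "not_present_in_1" [] (· ++ [plate])
    else if (3 : Int) ∈ lst ∧ PySem.List.index? (PySem.List.sorted lst (fun x => x) false) 3 = some 0 then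
      fd.modify "not_present_in_2" [] (· ++ [plate])
    else if (4 : Int) ∈ lst ∧ PySem.List.index? (PySem.List.sorted lst (fun x => x) false) 4 = some 0 then
      fd.modify "not_present_in_3" [] (· ++ [plate])
    else if (5 : Int) ∈ lst ∧ PySem.List.index? (PySem.List.sorted lst (fun x => x) false) 5 = some 0 then
      fd.modify "not_present_in_4" [] (· ++ [plate])
    else if (6 : Int) ∈ lst ∧ PySem.List.index? (PySem.List.sorted lst (fun x => x) false) 6 = some 0 then
      fd.modify "not_present_in_5" [] (· ++ [plate])
    else if (7 : Int) ∈ lst ∧ PySem.List.index? (PySem.List.sorted lst (fun x => x) false) 7 = some 0 then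
      fd.modify "not_present_in_6" [] (· ++ [plate])
    else if (8 : Int) ∈ lst ∧ PySem.List.index? (PySem.List.sorted lst (fun x => x) false) 8 = some 0 then
      fd.modify "not_present_in_7" [] (· ++ [plate])
    else fd) fd
  let fd := fd.keys.foldl (fun fd datum =>
    fd.insert datum (PySem.List.sorted (fd.getD datum []) (fun x => x) false)) fd
  fd.items

-- ===== PORT B =====
def lp_process_alt (data : List (Int × List String)) : List (String × List String) :=
  let d : PySem.Dict Int (List String) := PySem.Dict.mk data
  let keysDesc := PySem.List.sorted d.keys (fun x => x) true
  let s0 : PySem.Set String := PySem.Set.ofList (d.getD (PySem.List.pyGetD keysDesc 0 0) [])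
  let rest : List (PySem.Set String) :=
    (PySem.List.slice keysDesc (some 1) none).map (fun k => PySem.Set.ofList (d.getD k []))
  let scanSets := s0 :: rest
  let interAll := rest.foldl PySem.Set.inter s0
  let firstTime := rest.foldl PySem.Set.diff (PySem.Set.diff s0 interAll)
  let prefixUnions := (PySem.List.slice rest none (some 7)).foldl
    (fun pu s => pu ++ [PySem.Set.union (PySem.List.pyGetD pu (-1) []) s])
    [PySem.Set.ofList s0]
  let result : PySem.Dict String (List String) :=
    (PySem.Dict.empty).insert "first_time" (PySem.List.sorted firstTime (fun x => x) false)
  let result := (PySem.List.pyRange 1 8 1).foldl (fun res i =>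
    if i < (scanSets.length : Int) then
      res.insert ("not_present_in_" ++ PySem.Int.toStr i)
        (PySem.List.sorted
          (PySem.Set.diff (PySem.List.pyGetD scanSets i []) (PySem.List.pyGetD prefixUnions (i - 1) []))
          (fun x => x) false)
    else res.insert ("not_present_in_" ++ PySem.Int.toStr i) []) result
  (result.insert "present_in_all" (PySem.List.sorted interAll (fun x => x) false)).items

-- ===== PRECONDITION & SPEC =====
-- Pre_ excludes the empty dict (A raises IndexError on keys[-1]) and association lists with a
-- repeated key, which do not represent a Python dict (Python keeps one entry per key).
def Pre_lp_process (data : List (Int × List String)) : Prop :=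
  data ≠ [] ∧ (data.map Prod.fst).Nodup
instance (data : List (Int × List String)) : Decidable (Pre_lp_process data) := by
  unfold Pre_lp_process; infer_instance
def pvWitness_lp_process : (List (Int × List String)) :=
  [(2, ["a", "b"]), (1, ["b", "c"])]
def Spec_lp_process (data : List (Int × List String)) (out : List (String × List String)) : Prop := out = lp_process_alt data
instance (data : List (Int × List String)) (out : List (String × List String)) : Decidable (Spec_lp_process data out) := by unfold Spec_lp_process; infer_instance

-- ===== CLAIM (what is proved, stated in full; the proofs are below) =====
def Claim_equal_lp_process : Prop := ∀ (data : List (Int × List String)), Dom_lp_process data → Pre_lp_process data → Spec_lp_process data (lp_process data)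

-- ===== LEMMAS AND PROOFS =====


-- spec-level: sl is the list of raw scan plate-lists, scan j (0-based)
def pvScansUpTo (sl : List (List String)) (p : String) (t : Nat) : List Int :=
  ((List.range t).filter (fun j => decide (p ∈ sl.getD j []))).map (fun (j : Nat) => (j : Int) + 1)

def pvPlatesUpTo (sl : List (List String)) (t : Nat) : PySem.Set String :=
  (List.range t).foldl (fun s j => PySem.Set.update s (sl.getD j [])) []

lemma pvScansUpTo_succ (sl p t) :
    pvScansUpTo sl p (t + 1) =
      pvScansUpTo sl p t ++ (if p ∈ sl.getD t [] then [(t : Int) + 1] else []) := by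
  unfold pvScansUpTo
  rw [List.range_succ, List.filter_append, List.map_append]
  by_cases h : p ∈ sl.getD t [] <;> simp [List.getD] at h ⊢ <;> simp [h]

lemma pvPlatesUpTo_succ (sl t) :
    pvPlatesUpTo sl (t + 1) = PySem.Set.update (pvPlatesUpTo sl t) (sl.getD t []) := by
  unfold pvPlatesUpTo
  rw [List.range_succ, List.foldl_append]
  rfl

lemma mem_pvScansUpTo (sl p t x) :
    x ∈ pvScansUpTo sl p t ↔ ∃ j < t, x = (j : Int) + 1 ∧ p ∈ sl.getD j [] := by
  unfold pvScansUpTo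
  simp [List.mem_filter, List.mem_range]
  constructor
  · rintro ⟨j, ⟨hj, hp⟩, rfl⟩; exact ⟨j, hj, rfl, hp⟩
  · rintro ⟨j, hj, rfl, hp⟩; exact ⟨j, ⟨hj, hp⟩, rfl⟩

lemma mem_pvScansUpTo_le (sl p t) {x} (hx : x ∈ pvScansUpTo sl p t) : 1 ≤ x ∧ x ≤ (t : Int) := by
  rw [mem_pvScansUpTo] at hx
  obtain ⟨j, hj, rfl, -⟩ := hx
  omega

lemma pairwise_lt_pvScansUpTo (sl p t) : (pvScansUpTo sl p t).Pairwise (· < ·) := by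
  unfold pvScansUpTo
  have hf := (List.pairwise_lt_range (n := t)).filter (fun j => decide (p ∈ sl.getD j []))
  exact List.Pairwise.map _ (fun a b h => by omega) hf

lemma mem_pvPlatesUpTo (sl t p) : p ∈ pvPlatesUpTo sl t ↔ ∃ j < t, p ∈ sl.getD j [] := by
  induction t with
  | zero => simp [pvPlatesUpTo]
  | succ t ih =>
    rw [pvPlatesUpTo_succ, PySem.Set.mem_update, ih]
    constructor
    · rintro (⟨j, hj, hp⟩ | hp)
      · exact ⟨j, by omega, hp⟩
      · exact ⟨t, by omega, hp⟩
    · rintro ⟨j, hj, hp⟩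
      rcases Nat.lt_succ_iff_lt_or_eq.1 hj with h | rfl
      · exact Or.inl ⟨j, h, hp⟩
      · exact Or.inr hp

lemma nodup_pvPlatesUpTo (sl t) : (pvPlatesUpTo sl t).Nodup := by
  induction t with
  | zero => simp [pvPlatesUpTo]
  | succ t ih => rw [pvPlatesUpTo_succ]; exact PySem.Set.nodup_update _ _ ih


-- ===== A's first loop: every visited plate ends at (count, [1]) =====
lemma pvLoop1_getD (cnt : PySem.Dict String Int) (l : List String)
    (pc : PySem.Dict String (Int × List Int)) (p : String) :
    ((l.foldl (fun pc plate =>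
        let pc := pc.insert plate (cnt.getD plate 0, ([] : List Int))
        if (1 : Int) ∈ (pc.getD plate (0, [])).2 then pc
        else pc.modify plate (0, []) (fun cv => (cv.1, cv.2 ++ [1]))) pc)).getD p (0, []) =
      if p ∈ l then (cnt.getD p 0, [1]) else pc.getD p (0, []) := by
  induction l generalizing pc with
  | nil => simp
  | cons q l ih =>
    simp only [List.foldl_cons]
    rw [ih]
    simp only [PySem.Dict.getD_insert_self, List.not_mem_nil, if_false]
    by_cases hpl : p ∈ l
    · simp [hpl]
    · by_cases hpq : p = q
      · subst hpq
        simp [hpl, PySem.Dict.getD_modify, PySem.Dict.getD_insert]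
      · simp [hpl, hpq, PySem.Dict.getD_modify, PySem.Dict.getD_insert]

lemma pvLoop1_keys (cnt : PySem.Dict String Int) (l : List String)
    (pc : PySem.Dict String (Int × List Int)) :
    ((l.foldl (fun pc plate =>
        let pc := pc.insert plate (cnt.getD plate 0, ([] : List Int))
        if (1 : Int) ∈ (pc.getD plate (0, [])).2 then pc
        else pc.modify plate (0, []) (fun cv => (cv.1, cv.2 ++ [1]))) pc)).keys =
      PySem.Set.update pc.keys l := by
  induction l generalizing pc with
  | nil => simp [PySem.Set.update]
  | cons q l ih =>
    simp only [List.foldl_cons]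
    rw [ih, PySem.Set.update_cons]
    congr 1
    simp only [PySem.Dict.getD_insert_self, List.not_mem_nil, if_false]
    rw [PySem.Dict.keys_modify]
    by_cases hq : pc.contains q = true
    · rw [PySem.Dict.keys_insert_of_contains, PySem.Dict.keys_insert_of_contains _ _ hq,
        PySem.Set.add_of_mem ((PySem.Dict.contains_iff_mem_keys _ _).1 hq)]
      simp [PySem.Dict.contains_insert]
    · rw [PySem.Dict.keys_insert_of_contains, PySem.Dict.keys_insert_of_not_contains _ _
        (by simpa using hq), PySem.Set.add_of_not_mem
          (fun h => hq ((PySem.Dict.contains_iff_mem_keys _ _).2 h))]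
      simp [PySem.Dict.contains_insert]

-- ===== A's inner second loop =====
lemma pvLoop2Inner_body_getD_ne (sn : Int) (pc : PySem.Dict String (Int × List Int)) (q p : String)
    (hne : p ≠ q) :
    ((if pc.contains q then
        let pc := pc.modify q (0, []) (fun cv : Int × List Int => (cv.1 + 1, cv.2))
        if sn ∈ (pc.getD q (0, [])).2 then pc
        else pc.modify q (0, []) (fun cv => (cv.1, cv.2 ++ [sn]))
      else
        let pc := pc.insert q (1, ([] : List Int))
        pc.modify q (0, []) (fun cv => (cv.1, cv.2 ++ [sn]))) : PySem.Dict String (Int × List Int)).getD p (0, []) =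
      pc.getD p (0, []) := by
  by_cases hq : pc.contains q = true
  · simp only [hq, if_true]
    split_ifs <;> simp [PySem.Dict.getD_modify, hne]
  · simp [hq, PySem.Dict.getD_modify, PySem.Dict.getD_insert, hne]

lemma pvLoop2Inner_body_getD_self (sn : Int) (pc : PySem.Dict String (Int × List Int)) (q : String)
    (hs : sn ∉ (pc.getD q (0, [])).2) :
    (((if pc.contains q then
        let pc := pc.modify q (0, []) (fun cv : Int × List Int => (cv.1 + 1, cv.2))
        if sn ∈ (pc.getD q (0, [])).2 then pc
        else pc.modify q (0, []) (fun cv => (cv.1, cv.2 ++ [sn]))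
      else
        let pc := pc.insert q (1, ([] : List Int))
        pc.modify q (0, []) (fun cv => (cv.1, cv.2 ++ [sn]))) : PySem.Dict String (Int × List Int)).getD q (0, [])).2 =
      (pc.getD q (0, [])).2 ++ [sn] := by
  by_cases hq : pc.contains q = true
  · have h0 : ((pc.modify q (0, []) (fun cv : Int × List Int => (cv.1 + 1, cv.2))).getD q (0, [])).2
        = (pc.getD q (0, [])).2 := by simp [PySem.Dict.getD_modify]
    simp only [hq, if_true]
    rw [if_neg (by rw [h0]; exact hs)]
    simp [PySem.Dict.getD_modify]
  · have h0 : pc.getD q (0, []) = (0, []) :=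
      PySem.Dict.getD_of_not_contains _ _ (by simpa using hq)
    simp [hq, PySem.Dict.getD_modify, PySem.Dict.getD_insert, h0]

lemma pvLoop2Inner_body_keys (sn : Int) (pc : PySem.Dict String (Int × List Int)) (q : String) :
    ((if pc.contains q then
        let pc := pc.modify q (0, []) (fun cv : Int × List Int => (cv.1 + 1, cv.2))
        if sn ∈ (pc.getD q (0, [])).2 then pc
        else pc.modify q (0, []) (fun cv => (cv.1, cv.2 ++ [sn]))
      else
        let pc := pc.insert q (1, ([] : List Int))
        pc.modify q (0, []) (fun cv => (cv.1, cv.2 ++ [sn]))) : PySem.Dict String (Int × List Int)).keys =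
      PySem.Set.add pc.keys q := by
  by_cases hq : pc.contains q = true
  · have hk : q ∈ pc.keys := (PySem.Dict.contains_iff_mem_keys _ _).1 hq
    have hkm : (pc.modify q (0, []) (fun cv : Int × List Int => (cv.1 + 1, cv.2))).keys = pc.keys := by
      rw [PySem.Dict.keys_modify, PySem.Dict.keys_insert_of_contains _ _ hq]
    simp only [hq, if_true]
    split_ifs
    · rw [hkm, PySem.Set.add_of_mem hk]
    · rw [PySem.Dict.keys_modify, PySem.Dict.keys_insert_of_contains, hkm,
        PySem.Set.add_of_mem hk]
      simp [PySem.Dict.contains_modify, hq]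
  · have hk : q ∉ pc.keys := fun h => hq ((PySem.Dict.contains_iff_mem_keys _ _).2 h)
    simp only [hq, if_false, Bool.false_eq_true]
    rw [PySem.Dict.keys_modify, PySem.Dict.keys_insert_of_contains,
      PySem.Dict.keys_insert_of_not_contains _ _ (by simpa using hq),
      PySem.Set.add_of_not_mem hk]
    simp [PySem.Dict.contains_insert]

lemma pvLoop2Inner_getD (sn : Int) (l : List String) (hnd : l.Nodup)
    (pc : PySem.Dict String (Int × List Int))
    (hsn : ∀ p ∈ l, sn ∉ (pc.getD p (0, [])).2) (p : String) :
    ((l.foldl (fun pc plate =>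
        if pc.contains plate then
          let pc := pc.modify plate (0, []) (fun cv : Int × List Int => (cv.1 + 1, cv.2))
          if sn ∈ (pc.getD plate (0, [])).2 then pc
          else pc.modify plate (0, []) (fun cv => (cv.1, cv.2 ++ [sn]))
        else
          let pc := pc.insert plate (1, ([] : List Int))
          pc.modify plate (0, []) (fun cv => (cv.1, cv.2 ++ [sn]))) pc).getD p (0, [])).2 =
      if p ∈ l then (pc.getD p (0, [])).2 ++ [sn] else (pc.getD p (0, [])).2 := by
  induction l generalizing pc with
  | nil => simp
  | cons q l ih =>
    simp only [List.foldl_cons]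
    rw [ih (hnd.of_cons) _ (fun p' hp' => by
      rw [pvLoop2Inner_body_getD_ne sn pc q p'
        (by rintro rfl; exact (List.nodup_cons.1 hnd).1 hp')]
      exact hsn p' (List.mem_cons_of_mem _ hp'))]
    by_cases hpl : p ∈ l
    · simp only [hpl, if_true, List.mem_cons, or_true]
      rw [pvLoop2Inner_body_getD_ne sn pc q p
        (by rintro rfl; exact (List.nodup_cons.1 hnd).1 hpl)]
    · by_cases hpq : p = q
      · subst hpq
        simp only [hpl, if_false, List.mem_cons, true_or, if_true]
        exact pvLoop2Inner_body_getD_self sn pc p (hsn p List.mem_cons_self)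
      · simp only [hpl, List.mem_cons, hpq, false_or, if_false]
        rw [pvLoop2Inner_body_getD_ne sn pc q p hpq]

lemma pvLoop2Inner_keys (sn : Int) (l : List String) (pc : PySem.Dict String (Int × List Int)) :
    ((l.foldl (fun pc plate =>
        if pc.contains plate then
          let pc := pc.modify plate (0, []) (fun cv : Int × List Int => (cv.1 + 1, cv.2))
          if sn ∈ (pc.getD plate (0, [])).2 then pc
          else pc.modify plate (0, []) (fun cv => (cv.1, cv.2 ++ [sn]))
        else
          let pc := pc.insert plate (1, ([] : List Int))
          pc.modify plate (0, []) (fun cv => (cv.1, cv.2 ++ [sn]))) pc)).keys =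
      PySem.Set.update pc.keys l := by
  induction l generalizing pc with
  | nil => simp [PySem.Set.update]
  | cons q l ih =>
    simp only [List.foldl_cons]
    rw [ih, PySem.Set.update_cons, pvLoop2Inner_body_keys]


def pvInv (sl : List (List String)) (pc : PySem.Dict String (Int × List Int)) (t : Nat) : Prop :=
  pc.keys = pvPlatesUpTo sl t ∧
  ∀ p : String, (pc.getD p ((0 : Int), ([] : List Int))).2 = pvScansUpTo sl p t

lemma pvUpdate_ofList (s : PySem.Set String) (xs : List String) :
    PySem.Set.update s (PySem.Set.ofList xs) = PySem.Set.update s xs := by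
  rw [PySem.Set.update_eq_append_filter, PySem.Set.update_eq_append_filter,
    PySem.Set.ofList_ofList]

lemma pvSl_getD (d : PySem.Dict Int (List String)) (keys : List Int) {m : Nat}
    (hm : m < keys.length) :
    (keys.reverse.map (fun k => d.getD k [])).getD (keys.length - 1 - m) [] =
      d.getD (keys.getD m 0) [] := by
  have h1 : keys.length - 1 - m < keys.length := by omega
  rw [List.getD_eq_getElem?_getD, List.getElem?_map,
    List.getElem?_reverse (by simpa using h1)]
  have h2 : keys.length - 1 - (keys.length - 1 - m) = m := by omega
  rw [h2, List.getElem?_eq_getElem hm]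
  simp [List.getD_eq_getElem?_getD, List.getElem?_eq_getElem hm]

lemma pvLoop2Outer (d : PySem.Dict Int (List String)) (keys : List Int)
    (m : Nat) (hm : m < keys.length)
    (pc : PySem.Dict String (Int × List Int))
    (hinv : pvInv (keys.reverse.map (fun k => d.getD k [])) pc (keys.length - m)) :
    pvInv (keys.reverse.map (fun k => d.getD k []))
      (((PySem.List.pyRange ((m : Int) - 1) (-1) (-1)).foldl
        (fun (st : PySem.Dict String (Int × List Int) × Int) i =>
          let tempCount : PySem.Dict String Int :=
            PySem.Dict.counter (d.getD (PySem.List.pyGetD keys i 0) [])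
          let pc := tempCount.keys.foldl (fun pc plate =>
            if pc.contains plate then
              let pc := pc.modify plate (0, []) (fun cv : Int × List Int => (cv.1 + 1, cv.2))
              if st.2 ∈ (pc.getD plate (0, [])).2 then pc
              else pc.modify plate (0, []) (fun cv => (cv.1, cv.2 ++ [st.2]))
            else
              let pc := pc.insert plate (1, ([] : List Int))
              pc.modify plate (0, []) (fun cv => (cv.1, cv.2 ++ [st.2]))) st.1
          (pc, st.2 + 1)) (pc, ((keys.length - m : Nat) : Int) + 1)).1)
      keys.length := by
  induction m generalizing pc with
  | zero =>
    rw [PySem.List.pyRange_neg_one_eq_nil (by omega)]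
    simpa using hinv
  | succ m ih =>
    have hcast : ((m + 1 : Nat) : Int) - 1 = (m : Int) := by push_cast; ring
    rw [hcast, PySem.List.pyRange_neg_one_cons (by omega)]
    simp only [List.foldl_cons]
    set sl := keys.reverse.map (fun k => d.getD k []) with hsl
    set t' : Nat := keys.length - (m + 1) with ht'
    have hxs : PySem.List.pyGetD keys (m : Int) 0 = keys.getD m 0 := by
      simp [PySem.List.pyGetD_natCast]
    have hslm : sl.getD t' [] = d.getD (keys.getD m 0) [] := by
      rw [hsl, ht']
      have : keys.length - (m + 1) = keys.length - 1 - m := by omega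
      rw [this, pvSl_getD d keys (by omega)]
    set sn : Int := ((keys.length - (m + 1) : Nat) : Int) + 1 with hsn
    have hsnle : ∀ p ∈ PySem.Set.ofList (d.getD (keys.getD m 0) []),
        sn ∉ (pc.getD p ((0 : Int), ([] : List Int))).2 := by
      intro p _ hmem
      rw [hinv.2 p] at hmem
      have := mem_pvScansUpTo_le sl p _ hmem
      omega
    -- the updated dict after processing scan t'
    have hinv' : pvInv sl
        ((PySem.Dict.counter (d.getD (keys.getD m 0) [])).keys.foldl
          (fun pc plate =>
            if pc.contains plate then
              let pc := pc.modify plate (0, []) (fun cv : Int × List Int => (cv.1 + 1, cv.2))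
              if sn ∈ (pc.getD plate (0, [])).2 then pc
              else pc.modify plate (0, []) (fun cv => (cv.1, cv.2 ++ [sn]))
            else
              let pc := pc.insert plate (1, ([] : List Int))
              pc.modify plate (0, []) (fun cv => (cv.1, cv.2 ++ [sn]))) pc)
        (keys.length - m) := by
      constructor
      · rw [PySem.Dict.keys_counter, pvLoop2Inner_keys, hinv.1]
        have : keys.length - m = t' + 1 := by omega
        rw [this, pvPlatesUpTo_succ, hslm, pvUpdate_ofList]
      · intro p
        rw [PySem.Dict.keys_counter,
          pvLoop2Inner_getD sn _ (PySem.Set.nodup_ofList _) pc hsnle p,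
          hinv.2 p]
        have : keys.length - m = t' + 1 := by omega
        rw [this, pvScansUpTo_succ, hslm]
        by_cases hp : p ∈ d.getD (keys.getD m 0) []
        · rw [if_pos ((PySem.Set.mem_ofList _ _).2 hp), if_pos hp]
        · rw [if_neg (fun hc => hp ((PySem.Set.mem_ofList _ _).1 hc)), if_neg hp, List.append_nil]
    have hfix : sn + 1 = ((keys.length - m : Nat) : Int) + 1 := by omega
    rw [hxs, hfix]
    exact ih (by omega) _ hinv'


def pvClassify (kk : Nat) (lst : List Int) : Option String :=
  if lst.length = kk then some "present_in_all"
  else if lst.length = 1 ∧ (1 : Int) ∈ lst then some "first_time"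
  else if (2 : Int) ∈ lst ∧ PySem.List.index? (PySem.List.sorted lst (fun x => x) false) 2 = some 0 then some "not_present_in_1"
  else if (3 : Int) ∈ lst ∧ PySem.List.index? (PySem.List.sorted lst (fun x => x) false) 3 = some 0 then some "not_present_in_2"
  else if (4 : Int) ∈ lst ∧ PySem.List.index? (PySem.List.sorted lst (fun x => x) false) 4 = some 0 then some "not_present_in_3"
  else if (5 : Int) ∈ lst ∧ PySem.List.index? (PySem.List.sorted lst (fun x => x) false) 5 = some 0 then some "not_present_in_4"
  else if (6 : Int) ∈ lst ∧ PySem.List.index? (PySem.List.sorted lst (fun x => x) false) 6 = some 0 then some "not_present_in_5"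
  else if (7 : Int) ∈ lst ∧ PySem.List.index? (PySem.List.sorted lst (fun x => x) false) 7 = some 0 then some "not_present_in_6"
  else if (8 : Int) ∈ lst ∧ PySem.List.index? (PySem.List.sorted lst (fun x => x) false) 8 = some 0 then some "not_present_in_7"
  else none

def pvL9 : List String :=
  ["first_time", "not_present_in_1", "not_present_in_2", "not_present_in_3", "not_present_in_4",
   "not_present_in_5", "not_present_in_6", "not_present_in_7", "present_in_all"]

lemma pvClassify_mem (kk : Nat) (lst : List Int) (c : String)
    (h : pvClassify kk lst = some c) : c ∈ pvL9 := by
  unfold pvClassify at h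
  split_ifs at h <;> simp_all [pvL9]

-- A's classification body, rephrased through pvClassify
lemma pvClassBody_eq (kl : Nat) (lst : List Int) (fd : PySem.Dict String (List String))
    (plate : String) :
    (if lst.length = kl then fd.modify "present_in_all" [] (· ++ [plate])
    else if lst.length = 1 ∧ (1 : Int) ∈ lst then fd.modify "first_time" [] (· ++ [plate])
    else if (2 : Int) ∈ lst ∧ PySem.List.index? (PySem.List.sorted lst (fun x => x) false) 2 = some 0 then
      fd.modify "not_present_in_1" [] (· ++ [plate])
    else if (3 : Int) ∈ lst ∧ PySem.List.index? (PySem.List.sorted lst (fun x => x) false) 3 = some 0 then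
      fd.modify "not_present_in_2" [] (· ++ [plate])
    else if (4 : Int) ∈ lst ∧ PySem.List.index? (PySem.List.sorted lst (fun x => x) false) 4 = some 0 then
      fd.modify "not_present_in_3" [] (· ++ [plate])
    else if (5 : Int) ∈ lst ∧ PySem.List.index? (PySem.List.sorted lst (fun x => x) false) 5 = some 0 then
      fd.modify "not_present_in_4" [] (· ++ [plate])
    else if (6 : Int) ∈ lst ∧ PySem.List.index? (PySem.List.sorted lst (fun x => x) false) 6 = some 0 then
      fd.modify "not_present_in_5" [] (· ++ [plate])
    else if (7 : Int) ∈ lst ∧ PySem.List.index? (PySem.List.sorted lst (fun x => x) false) 7 = some 0 then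
      fd.modify "not_present_in_6" [] (· ++ [plate])
    else if (8 : Int) ∈ lst ∧ PySem.List.index? (PySem.List.sorted lst (fun x => x) false) 8 = some 0 then
      fd.modify "not_present_in_7" [] (· ++ [plate])
    else fd) =
    (match pvClassify kl lst with
      | some c => fd.modify c [] (· ++ [plate])
      | none => fd) := by
  unfold pvClassify
  split_ifs <;> rfl

lemma pvClassFold_getD (kl : Nat) (pcf : PySem.Dict String (Int × List Int))
    (l : List String) (fd : PySem.Dict String (List String)) (c : String) :
    ((l.foldl (fun fd plate =>
      let lst := (pcf.getD plate ((0 : Int), ([] : List Int))).2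
      if lst.length = kl then fd.modify "present_in_all" [] (· ++ [plate])
      else if lst.length = 1 ∧ (1 : Int) ∈ lst then fd.modify "first_time" [] (· ++ [plate])
      else if (2 : Int) ∈ lst ∧ PySem.List.index? (PySem.List.sorted lst (fun x => x) false) 2 = some 0 then
        fd.modify "not_present_in_1" [] (· ++ [plate])
      else if (3 : Int) ∈ lst ∧ PySem.List.index? (PySem.List.sorted lst (fun x => x) false) 3 = some 0 then
        fd.modify "not_present_in_2" [] (· ++ [plate])
      else if (4 : Int) ∈ lst ∧ PySem.List.index? (PySem.List.sorted lst (fun x => x) false) 4 = some 0 then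
        fd.modify "not_present_in_3" [] (· ++ [plate])
      else if (5 : Int) ∈ lst ∧ PySem.List.index? (PySem.List.sorted lst (fun x => x) false) 5 = some 0 then
        fd.modify "not_present_in_4" [] (· ++ [plate])
      else if (6 : Int) ∈ lst ∧ PySem.List.index? (PySem.List.sorted lst (fun x => x) false) 6 = some 0 then
        fd.modify "not_present_in_5" [] (· ++ [plate])
      else if (7 : Int) ∈ lst ∧ PySem.List.index? (PySem.List.sorted lst (fun x => x) false) 7 = some 0 then
        fd.modify "not_present_in_6" [] (· ++ [plate])
      else if (8 : Int) ∈ lst ∧ PySem.List.index? (PySem.List.sorted lst (fun x => x) false) 8 = some 0 then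
        fd.modify "not_present_in_7" [] (· ++ [plate])
      else fd) fd)).getD c [] =
      fd.getD c [] ++
        l.filter (fun p => pvClassify kl ((pcf.getD p ((0 : Int), ([] : List Int))).2) == some c) := by
  induction l generalizing fd with
  | nil => simp
  | cons q l ih =>
    simp only [List.foldl_cons]
    rw [pvClassBody_eq]
    rcases h : pvClassify kl ((pcf.getD q ((0 : Int), ([] : List Int))).2) with - | b
    · rw [List.filter_cons_of_neg (by simp [h]), ih]
    · rw [ih]
      by_cases hbc : b = c
      · subst hbc
        rw [List.filter_cons_of_pos (by simp [h])]
        simp [PySem.Dict.getD_modify, List.append_assoc]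
      · rw [List.filter_cons_of_neg (by simp [h, hbc])]
        rw [PySem.Dict.getD_modify, if_neg (fun hh => hbc hh.symm)]

lemma pvModify_keys_of_contains (fd : PySem.Dict String (List String)) (b : String)
    (f : List String → List String) (hb : fd.contains b = true) :
    (fd.modify b [] f).keys = fd.keys := by
  rw [PySem.Dict.keys_modify, PySem.Dict.keys_insert_of_contains _ _ hb]

lemma pvClassFold_keys (kl : Nat) (pcf : PySem.Dict String (Int × List Int))
    (l : List String) (fd : PySem.Dict String (List String))
    (h9 : ∀ c ∈ pvL9, c ∈ fd.keys) :
    ((l.foldl (fun fd plate =>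
      let lst := (pcf.getD plate ((0 : Int), ([] : List Int))).2
      if lst.length = kl then fd.modify "present_in_all" [] (· ++ [plate])
      else if lst.length = 1 ∧ (1 : Int) ∈ lst then fd.modify "first_time" [] (· ++ [plate])
      else if (2 : Int) ∈ lst ∧ PySem.List.index? (PySem.List.sorted lst (fun x => x) false) 2 = some 0 then
        fd.modify "not_present_in_1" [] (· ++ [plate])
      else if (3 : Int) ∈ lst ∧ PySem.List.index? (PySem.List.sorted lst (fun x => x) false) 3 = some 0 then
        fd.modify "not_present_in_2" [] (· ++ [plate])
      else if (4 : Int) ∈ lst ∧ PySem.List.index? (PySem.List.sorted lst (fun x => x) false) 4 = some 0 then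
        fd.modify "not_present_in_3" [] (· ++ [plate])
      else if (5 : Int) ∈ lst ∧ PySem.List.index? (PySem.List.sorted lst (fun x => x) false) 5 = some 0 then
        fd.modify "not_present_in_4" [] (· ++ [plate])
      else if (6 : Int) ∈ lst ∧ PySem.List.index? (PySem.List.sorted lst (fun x => x) false) 6 = some 0 then
        fd.modify "not_present_in_5" [] (· ++ [plate])
      else if (7 : Int) ∈ lst ∧ PySem.List.index? (PySem.List.sorted lst (fun x => x) false) 7 = some 0 then
        fd.modify "not_present_in_6" [] (· ++ [plate])
      else if (8 : Int) ∈ lst ∧ PySem.List.index? (PySem.List.sorted lst (fun x => x) false) 8 = some 0 then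
        fd.modify "not_present_in_7" [] (· ++ [plate])
      else fd) fd)).keys = fd.keys := by
  induction l generalizing fd with
  | nil => rfl
  | cons q l ih =>
    simp only [List.foldl_cons]
    rw [pvClassBody_eq]
    rcases h : pvClassify kl ((pcf.getD q ((0 : Int), ([] : List Int))).2) with - | b
    · exact ih fd h9
    · have hb : fd.contains b = true :=
        (PySem.Dict.contains_iff_mem_keys _ _).2 (h9 b (pvClassify_mem _ _ _ h))
      rw [ih _ (fun c hc => by
        rw [pvModify_keys_of_contains fd b _ hb]; exact h9 c hc),
        pvModify_keys_of_contains fd b _ hb]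

lemma pvSortPass_getD (l : List String) (hnd : l.Nodup)
    (fd : PySem.Dict String (List String)) (c : String) :
    ((l.foldl (fun fd datum =>
        fd.insert datum (PySem.List.sorted (fd.getD datum []) (fun x => x) false)) fd)).getD c [] =
      if c ∈ l then PySem.List.sorted (fd.getD c []) (fun x => x) false else fd.getD c [] := by
  induction l generalizing fd with
  | nil => simp
  | cons q l ih =>
    simp only [List.foldl_cons]
    rw [ih hnd.of_cons]
    by_cases hcl : c ∈ l
    · simp only [hcl, if_true, List.mem_cons, or_true]
      rw [PySem.Dict.getD_insert,
        if_neg (by rintro rfl; exact (List.nodup_cons.1 hnd).1 hcl)]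
    · by_cases hcq : c = q
      · subst hcq
        simp [hcl, PySem.Dict.getD_insert]
      · simp [hcl, hcq, PySem.Dict.getD_insert]

lemma pvSortPass_keys (l : List String) (fd : PySem.Dict String (List String))
    (h : ∀ x ∈ l, x ∈ fd.keys) :
    ((l.foldl (fun fd datum =>
        fd.insert datum (PySem.List.sorted (fd.getD datum []) (fun x => x) false)) fd)).keys =
      fd.keys := by
  induction l generalizing fd with
  | nil => rfl
  | cons q l ih =>
    simp only [List.foldl_cons]
    have hq : fd.contains q = true :=
      (PySem.Dict.contains_iff_mem_keys _ _).2 (h q List.mem_cons_self)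
    rw [ih _ (fun x hx => by
      rw [PySem.Dict.keys_insert_of_contains _ _ hq]
      exact h x (List.mem_cons_of_mem _ hx)),
      PySem.Dict.keys_insert_of_contains _ _ hq]


-- head of a strictly increasing list = its unique minimum
lemma pvHead_iff_min {lst : List Int} (hp : lst.Pairwise (· < ·)) (m : Int) :
    lst.head? = some m ↔ m ∈ lst ∧ ∀ x ∈ lst, m ≤ x := by
  constructor
  · intro h
    obtain ⟨ys, rfl⟩ := List.head?_eq_some_iff.1 h
    refine ⟨List.mem_cons_self, ?_⟩
    intro x hx
    rcases List.mem_cons.1 hx with rfl | hx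
    · exact le_refl _
    · exact le_of_lt ((List.pairwise_cons.1 hp).1 x hx)
  · rintro ⟨hm, hmin⟩
    cases lst with
    | nil => cases hm
    | cons h t =>
      rcases List.mem_cons.1 hm with rfl | hm
      · rfl
      · have h1 : h < m := (List.pairwise_cons.1 hp).1 m hm
        have h2 : m ≤ h := hmin h List.mem_cons_self
        omega

lemma pvIndex?_zero_iff {lst : List Int} (m : Int) :
    PySem.List.index? lst m = some 0 ↔ lst.head? = some m := by
  rw [PySem.List.index?_eq_some_iff, List.head?_eq_some_iff]
  constructor
  · rintro ⟨pre, suf, heq, hlen, -⟩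
    rw [List.length_eq_zero_iff.1 hlen] at heq
    exact ⟨suf, by simpa using heq⟩
  · rintro ⟨ys, rfl⟩
    exact ⟨[], ys, rfl, rfl, by simp⟩

lemma pvLen_iff (sl p t) :
    (pvScansUpTo sl p t).length = t ↔ ∀ j < t, p ∈ sl.getD j [] := by
  unfold pvScansUpTo
  rw [List.length_map]
  constructor
  · intro h j hj
    have := List.length_filter_eq_length_iff.1 (by simpa [List.length_range] using h) j
      (List.mem_range.2 hj)
    simpa using this
  · intro h
    rw [show (List.range t).filter (fun j => decide (p ∈ sl.getD j [])) = List.range t from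
      List.filter_eq_self.2 (fun j hj => by simpa using h j (List.mem_range.1 hj))]
    exact List.length_range

lemma pvSingleton_iff (sl p t) (ht : 1 ≤ t) :
    pvScansUpTo sl p t = [1] ↔
      (p ∈ sl.getD 0 [] ∧ ∀ j, 1 ≤ j → j < t → p ∉ sl.getD j []) := by
  constructor
  · intro h
    constructor
    · have h1 : (1 : Int) ∈ pvScansUpTo sl p t := by rw [h]; exact List.mem_cons_self
      rw [mem_pvScansUpTo] at h1
      obtain ⟨j, hj, hje, hp⟩ := h1
      have : j = 0 := by omega
      subst this; exact hp
    · intro j h1j hjt hp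
      have hmem : ((j : Int) + 1) ∈ pvScansUpTo sl p t :=
        (mem_pvScansUpTo sl p t _).2 ⟨j, hjt, rfl, hp⟩
      rw [h] at hmem
      rcases List.mem_cons.1 hmem with he | he
      · omega
      · cases he
  · rintro ⟨h0, hrest⟩
    have hall : ∀ x ∈ pvScansUpTo sl p t, x = 1 := by
      intro x hx
      rw [mem_pvScansUpTo] at hx
      obtain ⟨j, hj, rfl, hp⟩ := hx
      by_cases hj1 : 1 ≤ j
      · exact absurd hp (hrest j hj1 hj)
      · omega
    have hmem : (1 : Int) ∈ pvScansUpTo sl p t :=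
      (mem_pvScansUpTo sl p t _).2 ⟨0, by omega, by norm_num, h0⟩
    have hrep := List.eq_replicate_iff.2 ⟨rfl, hall⟩
    have hnd : (pvScansUpTo sl p t).Nodup :=
      (pairwise_lt_pvScansUpTo sl p t).imp ne_of_lt
    rw [hrep] at hnd ⊢
    have hlen : (pvScansUpTo sl p t).length ≤ 1 := List.nodup_replicate.1 hnd
    have hpos : 0 < (pvScansUpTo sl p t).length := List.length_pos_of_mem hmem
    have : (pvScansUpTo sl p t).length = 1 := by omega
    rw [this]
    rfl

lemma pvMemSucc_iff (sl p t) (j : Nat) :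
    ((j : Int) + 1) ∈ pvScansUpTo sl p t ↔ j < t ∧ p ∈ sl.getD j [] := by
  rw [mem_pvScansUpTo]
  constructor
  · rintro ⟨j', hj', hje, hp⟩
    have : j' = j := by omega
    subst this; exact ⟨hj', hp⟩
  · rintro ⟨hj, hp⟩; exact ⟨j, hj, rfl, hp⟩

lemma pvHeadSucc_iff (sl p t) (i : Nat) :
    (pvScansUpTo sl p t).head? = some ((i : Int) + 1) ↔
      (i < t ∧ p ∈ sl.getD i [] ∧ ∀ j < i, p ∉ sl.getD j []) := by
  rw [pvHead_iff_min (pairwise_lt_pvScansUpTo sl p t)]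
  constructor
  · rintro ⟨hm, hmin⟩
    rw [pvMemSucc_iff] at hm
    refine ⟨hm.1, hm.2, ?_⟩
    intro j hj hp
    by_cases hjt : j < t
    · have := hmin _ ((pvMemSucc_iff sl p t j).2 ⟨hjt, hp⟩)
      omega
    · omega
  · rintro ⟨hit, hpi, hmin⟩
    refine ⟨(pvMemSucc_iff sl p t i).2 ⟨hit, hpi⟩, ?_⟩
    intro x hx
    rw [mem_pvScansUpTo] at hx
    obtain ⟨j, hj, rfl, hp⟩ := hx
    have : ¬ j < i := fun hc => hmin j hc hp
    omega

-- classify, rephrased on the head of a strictly increasing scans list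

lemma pvClassify_spec (kk : Nat) (lst : List Int) (hp : lst.Pairwise (· < ·)) :
    pvClassify kk lst =
      if lst.length = kk then some "present_in_all"
      else if lst.length = 1 ∧ (1 : Int) ∈ lst then some "first_time"
      else if lst.head? = some 2 then some "not_present_in_1"
      else if lst.head? = some 3 then some "not_present_in_2"
      else if lst.head? = some 4 then some "not_present_in_3"
      else if lst.head? = some 5 then some "not_present_in_4"
      else if lst.head? = some 6 then some "not_present_in_5"
      else if lst.head? = some 7 then some "not_present_in_6"
      else if lst.head? = some 8 then some "not_present_in_7"
      else none := by
  have hs : PySem.List.sorted lst (fun x => x) false = lst :=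
    PySem.List.sorted_eq_self_of_pairwise lst _ (hp.imp le_of_lt)
  have hm : ∀ m : Int, ((m ∈ lst ∧ PySem.List.index? lst m = some 0) ↔ lst.head? = some m) := by
    intro m
    rw [pvIndex?_zero_iff]
    constructor
    · exact fun h => h.2
    · intro h
      exact ⟨((pvHead_iff_min hp m).1 h).1, h⟩
  unfold pvClassify
  rw [hs]
  simp only [hm]


lemma pvMem_foldl_inter (l : List (PySem.Set String)) (s : PySem.Set String) (p : String) :
    p ∈ l.foldl PySem.Set.inter s ↔ p ∈ s ∧ ∀ t ∈ l, p ∈ t := by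
  induction l generalizing s with
  | nil => simp
  | cons a l ih =>
    simp only [List.foldl_cons]
    rw [ih]
    simp only [PySem.Set.mem_inter, List.mem_cons]
    constructor
    · rintro ⟨⟨hs, ha⟩, hl⟩
      exact ⟨hs, fun t ht => by rcases ht with rfl | ht; exact ha; exact hl t ht⟩
    · rintro ⟨hs, hl⟩
      exact ⟨⟨hs, hl a (Or.inl rfl)⟩, fun t ht => hl t (Or.inr ht)⟩

lemma pvNodup_foldl_inter (l : List (PySem.Set String)) (s : PySem.Set String) (h : s.Nodup) :
    (l.foldl PySem.Set.inter s).Nodup := by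
  induction l generalizing s with
  | nil => exact h
  | cons a l ih => exact ih _ (PySem.Set.nodup_inter _ _ h)

lemma pvMem_foldl_diff (l : List (PySem.Set String)) (s : PySem.Set String) (p : String) :
    p ∈ l.foldl PySem.Set.diff s ↔ p ∈ s ∧ ∀ t ∈ l, p ∉ t := by
  induction l generalizing s with
  | nil => simp
  | cons a l ih =>
    simp only [List.foldl_cons]
    rw [ih]
    simp only [PySem.Set.mem_diff, List.mem_cons]
    constructor
    · rintro ⟨⟨hs, ha⟩, hl⟩
      exact ⟨hs, fun t ht => by rcases ht with rfl | ht; exact ha; exact hl t ht⟩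
    · rintro ⟨hs, hl⟩
      exact ⟨⟨hs, hl a (Or.inl rfl)⟩, fun t ht => hl t (Or.inr ht)⟩

lemma pvNodup_foldl_diff (l : List (PySem.Set String)) (s : PySem.Set String) (h : s.Nodup) :
    (l.foldl PySem.Set.diff s).Nodup := by
  induction l generalizing s with
  | nil => exact h
  | cons a l ih => exact ih _ (PySem.Set.nodup_diff _ _ h)

-- running prefix unions, as built by B's append loop
def pvPus (a : PySem.Set String) : List (PySem.Set String) → List (PySem.Set String)
  | [] => [a]
  | s :: l => a :: pvPus (PySem.Set.union a s) l

lemma pvPusFold (l : List (PySem.Set String)) (acc : List (PySem.Set String))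
    (a : PySem.Set String) :
    l.foldl (fun pu s => pu ++ [PySem.Set.union (PySem.List.pyGetD pu (-1) []) s]) (acc ++ [a]) =
      acc ++ pvPus a l := by
  induction l generalizing acc a with
  | nil => simp [pvPus]
  | cons s l ih =>
    simp only [List.foldl_cons]
    rw [PySem.List.pyGetD_neg_one_append_singleton]
    have : acc ++ [a] ++ [PySem.Set.union a s] = (acc ++ [a]) ++ [PySem.Set.union a s] := rfl
    rw [this, ih]
    simp [pvPus]

lemma pvPus_getD_mem (a : PySem.Set String) (l : List (PySem.Set String)) (j : Nat)
    (hj : j ≤ l.length) (p : String) :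
    p ∈ (pvPus a l).getD j [] ↔ p ∈ a ∨ ∃ s ∈ l.take j, p ∈ s := by
  induction l generalizing a j with
  | nil =>
    have : j = 0 := by simpa using hj
    subst this
    simp [pvPus]
  | cons s l ih =>
    cases j with
    | zero => simp [pvPus]
    | succ j =>
      simp only [pvPus, List.getD_cons_succ, List.take_succ_cons]
      rw [ih _ j (by simpa using hj)]
      simp only [PySem.Set.mem_union, List.mem_cons]
      constructor
      · rintro ((ha | hs) | ⟨t, ht, hp⟩)
        · exact Or.inl ha
        · exact Or.inr ⟨s, Or.inl rfl, hs⟩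
        · exact Or.inr ⟨t, Or.inr ht, hp⟩
      · rintro (ha | ⟨t, (rfl | ht), hp⟩)
        · exact Or.inl (Or.inl ha)
        · exact Or.inl (Or.inr hp)
        · exact Or.inr ⟨t, ht, hp⟩

lemma pvForall_tail_iff (sl : List (List String)) (Q : List String → Prop) :
    (∀ x ∈ sl.tail, Q x) ↔ ∀ j, 1 ≤ j → j < sl.length → Q (sl.getD j []) := by
  cases sl with
  | nil => simp
  | cons h t =>
    simp only [List.tail_cons, List.length_cons]
    constructor
    · intro hq j h1 hj
      cases j with
      | zero => omega
      | succ j =>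
        rw [List.getD_cons_succ, List.getD_eq_getElem _ _ (by omega : j < t.length)]
        exact hq _ (List.getElem_mem _)
    · intro hq x hx
      obtain ⟨j, hj, rfl⟩ := List.mem_iff_getElem.1 hx
      have := hq (j + 1) (by omega) (by omega)
      rwa [List.getD_cons_succ, List.getD_eq_getElem _ _ hj] at this

-- ===== shared: the scan lists (0-based scan j = plates under the (j+1)-th largest key) =====
def pvSl (data : List (Int × List String)) : List (List String) :=
  ((PySem.List.sorted (PySem.Dict.mk data).keys (fun x => x) false).reverse).map
    (fun k => (PySem.Dict.mk data).getD k [])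

def pvBucketA (sl : List (List String)) (c : String) : List String :=
  (pvPlatesUpTo sl sl.length).filter
    (fun p => pvClassify sl.length (pvScansUpTo sl p sl.length) == some c)

def pvSS (sl : List (List String)) (j : Nat) : PySem.Set String := PySem.Set.ofList (sl.getD j [])

def pvTailSets (sl : List (List String)) : List (PySem.Set String) :=
  sl.tail.map (fun x => PySem.Set.ofList x)

def pvIA (sl : List (List String)) : PySem.Set String :=
  (pvTailSets sl).foldl PySem.Set.inter (pvSS sl 0)

def pvFT (sl : List (List String)) : PySem.Set String :=
  (pvTailSets sl).foldl PySem.Set.diff (PySem.Set.diff (pvSS sl 0) (pvIA sl))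

def pvNP (sl : List (List String)) (i : Nat) : PySem.Set String :=
  PySem.Set.diff (pvSS sl i) ((pvPus (pvSS sl 0) ((pvTailSets sl).take 7)).getD (i - 1) [])

lemma pvSl_length (data : List (Int × List String)) :
    (pvSl data).length = (PySem.List.sorted (PySem.Dict.mk data).keys (fun x => x) false).length := by
  simp [pvSl]

lemma pvPlatesUpTo_one (sl : List (List String)) :
    pvPlatesUpTo sl 1 = PySem.Set.ofList (sl.getD 0 []) := by
  have h := pvPlatesUpTo_succ sl 0
  rw [h]
  show PySem.Set.update (pvPlatesUpTo sl 0) _ = _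
  have h0 : pvPlatesUpTo sl 0 = [] := rfl
  rw [h0, PySem.Set.update_nil_left]

lemma pvScansUpTo_one (sl : List (List String)) (p : String) :
    pvScansUpTo sl p 1 = if p ∈ sl.getD 0 [] then [(1 : Int)] else [] := by
  have h := pvScansUpTo_succ sl p 0
  rw [h]
  have h0 : pvScansUpTo sl p 0 = [] := rfl
  rw [h0, List.nil_append]
  norm_num

lemma pvItems_of_keys (fd : PySem.Dict String (List String)) (h : fd.keys = pvL9) :
    fd.items = pvL9.map (fun k => (k, fd.getD k [])) := by
  rw [PySem.Dict.items_eq_map_keys fd (by rw [h]; decide) ([] : List String), h]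

set_option maxHeartbeats 1600000 in
lemma pvTail_eq (kl : Nat) (pcf : PySem.Dict String (Int × List Int)) :
    (((pcf.keys.foldl (fun fd plate =>
      let lst := (pcf.getD plate ((0 : Int), ([] : List Int))).2
      if lst.length = kl then fd.modify "present_in_all" [] (· ++ [plate])
      else if lst.length = 1 ∧ (1 : Int) ∈ lst then fd.modify "first_time" [] (· ++ [plate])
      else if (2 : Int) ∈ lst ∧ PySem.List.index? (PySem.List.sorted lst (fun x => x) false) 2 = some 0 then
        fd.modify "not_present_in_1" [] (· ++ [plate])
      else if (3 : Int) ∈ lst ∧ PySem.List.index? (PySem.List.sorted lst (fun x => x) false) 3 = some 0 then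
        fd.modify "not_present_in_2" [] (· ++ [plate])
      else if (4 : Int) ∈ lst ∧ PySem.List.index? (PySem.List.sorted lst (fun x => x) false) 4 = some 0 then
        fd.modify "not_present_in_3" [] (· ++ [plate])
      else if (5 : Int) ∈ lst ∧ PySem.List.index? (PySem.List.sorted lst (fun x => x) false) 5 = some 0 then
        fd.modify "not_present_in_4" [] (· ++ [plate])
      else if (6 : Int) ∈ lst ∧ PySem.List.index? (PySem.List.sorted lst (fun x => x) false) 6 = some 0 then
        fd.modify "not_present_in_5" [] (· ++ [plate])
      else if (7 : Int) ∈ lst ∧ PySem.List.index? (PySem.List.sorted lst (fun x => x) false) 7 = some 0 then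
        fd.modify "not_present_in_6" [] (· ++ [plate])
      else if (8 : Int) ∈ lst ∧ PySem.List.index? (PySem.List.sorted lst (fun x => x) false) 8 = some 0 then
        fd.modify "not_present_in_7" [] (· ++ [plate])
      else fd) ((((((((((PySem.Dict.empty : PySem.Dict String (List String)).insert "first_time" []).insert "not_present_in_1" []).insert
      "not_present_in_2" []).insert "not_present_in_3" []).insert "not_present_in_4" []).insert
      "not_present_in_5" []).insert "not_present_in_6" []).insert "not_present_in_7" []).insert
      "present_in_all" []))).keys.foldl (fun fd datum =>
        fd.insert datum (PySem.List.sorted (fd.getD datum []) (fun x => x) false)) (pcf.keys.foldl (fun fd plate =>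
      let lst := (pcf.getD plate ((0 : Int), ([] : List Int))).2
      if lst.length = kl then fd.modify "present_in_all" [] (· ++ [plate])
      else if lst.length = 1 ∧ (1 : Int) ∈ lst then fd.modify "first_time" [] (· ++ [plate])
      else if (2 : Int) ∈ lst ∧ PySem.List.index? (PySem.List.sorted lst (fun x => x) false) 2 = some 0 then
        fd.modify "not_present_in_1" [] (· ++ [plate])
      else if (3 : Int) ∈ lst ∧ PySem.List.index? (PySem.List.sorted lst (fun x => x) false) 3 = some 0 then
        fd.modify "not_present_in_2" [] (· ++ [plate])
      else if (4 : Int) ∈ lst ∧ PySem.List.index? (PySem.List.sorted lst (fun x => x) false) 4 = some 0 then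
        fd.modify "not_present_in_3" [] (· ++ [plate])
      else if (5 : Int) ∈ lst ∧ PySem.List.index? (PySem.List.sorted lst (fun x => x) false) 5 = some 0 then
        fd.modify "not_present_in_4" [] (· ++ [plate])
      else if (6 : Int) ∈ lst ∧ PySem.List.index? (PySem.List.sorted lst (fun x => x) false) 6 = some 0 then
        fd.modify "not_present_in_5" [] (· ++ [plate])
      else if (7 : Int) ∈ lst ∧ PySem.List.index? (PySem.List.sorted lst (fun x => x) false) 7 = some 0 then
        fd.modify "not_present_in_6" [] (· ++ [plate])
      else if (8 : Int) ∈ lst ∧ PySem.List.index? (PySem.List.sorted lst (fun x => x) false) 8 = some 0 then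
        fd.modify "not_present_in_7" [] (· ++ [plate])
      else fd) ((((((((((PySem.Dict.empty : PySem.Dict String (List String)).insert "first_time" []).insert "not_present_in_1" []).insert
      "not_present_in_2" []).insert "not_present_in_3" []).insert "not_present_in_4" []).insert
      "not_present_in_5" []).insert "not_present_in_6" []).insert "not_present_in_7" []).insert
      "present_in_all" []))).items =
      pvL9.map (fun c =>
        (c, PySem.List.sorted (pcf.keys.filter
          (fun p => pvClassify kl ((pcf.getD p ((0 : Int), ([] : List Int))).2) == some c))
          (fun x => x) false)) := by
  have h9 : ∀ c ∈ pvL9, c ∈ (((((((((((PySem.Dict.empty : PySem.Dict String (List String)).insert "first_time" []).insert "not_present_in_1" []).insert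
      "not_present_in_2" []).insert "not_present_in_3" []).insert "not_present_in_4" []).insert
      "not_present_in_5" []).insert "not_present_in_6" []).insert "not_present_in_7" []).insert
      "present_in_all" []) : PySem.Dict String (List String)).keys := by decide
  have hnd9 : pvL9.Nodup := by decide
  have hk1 : ((pcf.keys.foldl (fun fd plate =>
      let lst := (pcf.getD plate ((0 : Int), ([] : List Int))).2
      if lst.length = kl then fd.modify "present_in_all" [] (· ++ [plate])
      else if lst.length = 1 ∧ (1 : Int) ∈ lst then fd.modify "first_time" [] (· ++ [plate])
      else if (2 : Int) ∈ lst ∧ PySem.List.index? (PySem.List.sorted lst (fun x => x) false) 2 = some 0 then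
        fd.modify "not_present_in_1" [] (· ++ [plate])
      else if (3 : Int) ∈ lst ∧ PySem.List.index? (PySem.List.sorted lst (fun x => x) false) 3 = some 0 then
        fd.modify "not_present_in_2" [] (· ++ [plate])
      else if (4 : Int) ∈ lst ∧ PySem.List.index? (PySem.List.sorted lst (fun x => x) false) 4 = some 0 then
        fd.modify "not_present_in_3" [] (· ++ [plate])
      else if (5 : Int) ∈ lst ∧ PySem.List.index? (PySem.List.sorted lst (fun x => x) false) 5 = some 0 then
        fd.modify "not_present_in_4" [] (· ++ [plate])
      else if (6 : Int) ∈ lst ∧ PySem.List.index? (PySem.List.sorted lst (fun x => x) false) 6 = some 0 then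
        fd.modify "not_present_in_5" [] (· ++ [plate])
      else if (7 : Int) ∈ lst ∧ PySem.List.index? (PySem.List.sorted lst (fun x => x) false) 7 = some 0 then
        fd.modify "not_present_in_6" [] (· ++ [plate])
      else if (8 : Int) ∈ lst ∧ PySem.List.index? (PySem.List.sorted lst (fun x => x) false) 8 = some 0 then
        fd.modify "not_present_in_7" [] (· ++ [plate])
      else fd) ((((((((((PySem.Dict.empty : PySem.Dict String (List String)).insert "first_time" []).insert "not_present_in_1" []).insert
      "not_present_in_2" []).insert "not_present_in_3" []).insert "not_present_in_4" []).insert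
      "not_present_in_5" []).insert "not_present_in_6" []).insert "not_present_in_7" []).insert
      "present_in_all" []))).keys = pvL9 := by
    rw [pvClassFold_keys _ _ _ _ h9]
    rfl
  rw [hk1]
  have hk2 : ((pvL9.foldl (fun fd datum =>
      fd.insert datum (PySem.List.sorted (fd.getD datum []) (fun x => x) false)) (pcf.keys.foldl (fun fd plate =>
      let lst := (pcf.getD plate ((0 : Int), ([] : List Int))).2
      if lst.length = kl then fd.modify "present_in_all" [] (· ++ [plate])
      else if lst.length = 1 ∧ (1 : Int) ∈ lst then fd.modify "first_time" [] (· ++ [plate])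
      else if (2 : Int) ∈ lst ∧ PySem.List.index? (PySem.List.sorted lst (fun x => x) false) 2 = some 0 then
        fd.modify "not_present_in_1" [] (· ++ [plate])
      else if (3 : Int) ∈ lst ∧ PySem.List.index? (PySem.List.sorted lst (fun x => x) false) 3 = some 0 then
        fd.modify "not_present_in_2" [] (· ++ [plate])
      else if (4 : Int) ∈ lst ∧ PySem.List.index? (PySem.List.sorted lst (fun x => x) false) 4 = some 0 then
        fd.modify "not_present_in_3" [] (· ++ [plate])
      else if (5 : Int) ∈ lst ∧ PySem.List.index? (PySem.List.sorted lst (fun x => x) false) 5 = some 0 then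
        fd.modify "not_present_in_4" [] (· ++ [plate])
      else if (6 : Int) ∈ lst ∧ PySem.List.index? (PySem.List.sorted lst (fun x => x) false) 6 = some 0 then
        fd.modify "not_present_in_5" [] (· ++ [plate])
      else if (7 : Int) ∈ lst ∧ PySem.List.index? (PySem.List.sorted lst (fun x => x) false) 7 = some 0 then
        fd.modify "not_present_in_6" [] (· ++ [plate])
      else if (8 : Int) ∈ lst ∧ PySem.List.index? (PySem.List.sorted lst (fun x => x) false) 8 = some 0 then
        fd.modify "not_present_in_7" [] (· ++ [plate])
      else fd) ((((((((((PySem.Dict.empty : PySem.Dict String (List String)).insert "first_time" []).insert "not_present_in_1" []).insert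
      "not_present_in_2" []).insert "not_present_in_3" []).insert "not_present_in_4" []).insert
      "not_present_in_5" []).insert "not_present_in_6" []).insert "not_present_in_7" []).insert
      "present_in_all" [])))).keys = pvL9 := by
    rw [pvSortPass_keys _ _ (fun x hx => hk1 ▸ hx), hk1]
  rw [pvItems_of_keys _ hk2]
  refine List.map_congr_left (fun c hc => ?_)
  rw [pvSortPass_getD _ hnd9, if_pos hc, pvClassFold_getD]
  have hz : (((((((((((PySem.Dict.empty : PySem.Dict String (List String)).insert "first_time" []).insert "not_present_in_1" []).insert
      "not_present_in_2" []).insert "not_present_in_3" []).insert "not_present_in_4" []).insert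
      "not_present_in_5" []).insert "not_present_in_6" []).insert "not_present_in_7" []).insert
      "present_in_all" []) : PySem.Dict String (List String)).getD c [] = [] := by
    fin_cases hc <;> rfl
  rw [hz, List.nil_append]

lemma pvA_eq (data : List (Int × List String)) (hne : data ≠ [])
    (_hnd : (data.map Prod.fst).Nodup) :
    lp_process data = pvL9.map (fun c =>
      (c, PySem.List.sorted (pvBucketA (pvSl data) c) (fun x => x) false)) := by
  simp only [lp_process]
  set d := PySem.Dict.mk data with hd
  set keys := PySem.List.sorted d.keys (fun x => x) false with hkeys
  have hdk : d.keys = data.map Prod.fst := rfl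
  have hkne : keys ≠ [] := by
    rw [hkeys, Ne, PySem.List.sorted_eq_nil_iff, hdk]
    simpa using hne
  have hK1 : 1 ≤ keys.length := List.length_pos_of_ne_nil hkne
  have hslr : pvSl data = keys.reverse.map (fun k => d.getD k []) := rfl
  have hslk : (pvSl data).length = keys.length := by rw [hslr]; simp
  -- the plates of the first scan
  have hidx : ((keys.length : Int) - 1) = ((keys.length - 1 : Nat) : Int) := by omega
  rw [hidx, PySem.List.pyGetD_natCast]
  have hx0 : d.getD (keys.getD (keys.length - 1) 0) [] = (pvSl data).getD 0 [] := by
    have h := pvSl_getD d keys (m := keys.length - 1) (by omega)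
    rw [hslr]
    have h2 : keys.length - 1 - (keys.length - 1) = 0 := by omega
    rw [h2] at h
    exact h.symm
  rw [hx0]
  rw [PySem.Dict.keys_counter]
  -- invariant after the first loop
  have hinv1 : pvInv (pvSl data)
      ((PySem.Set.ofList ((pvSl data).getD 0 [])).foldl (fun pc plate =>
        let pc := pc.insert plate ((PySem.Dict.counter ((pvSl data).getD 0 [])).getD plate 0, ([] : List Int))
        if (1 : Int) ∈ (pc.getD plate (0, [])).2 then pc
        else pc.modify plate (0, []) (fun cv => (cv.1, cv.2 ++ [1]))) PySem.Dict.empty) 1 := by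
    constructor
    · rw [pvLoop1_keys]
      have he : (PySem.Dict.empty : PySem.Dict String (Int × List Int)).keys = [] := rfl
      rw [he, PySem.Set.update_nil_left, PySem.Set.ofList_ofList, pvPlatesUpTo_one]
    · intro p
      rw [pvLoop1_getD, pvScansUpTo_one]
      by_cases hp : p ∈ (pvSl data).getD 0 []
      · rw [if_pos ((PySem.Set.mem_ofList _ _).2 hp), if_pos hp]
      · rw [if_neg (fun hc => hp ((PySem.Set.mem_ofList _ _).1 hc)), if_neg hp]
        rfl
  have hfin := pvLoop2Outer d keys (keys.length - 1) (by omega) _ (by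
    have harith : keys.length - (keys.length - 1) = 1 := by omega
    rw [harith]
    exact hinv1)
  rw [show ((keys.length - 1 : Nat) : Int) - 1 = (keys.length : Int) - 2 from by omega,
    show ((keys.length - (keys.length - 1) : Nat) : Int) + 1 = (2 : Int) from by omega] at hfin
  rw [← hslr] at hfin
  -- hfin : pvInv (pvSl data) ((outer fold).1) keys.length
  rw [pvTail_eq]
  refine List.map_congr_left (fun c hc => ?_)
  refine Prod.ext rfl ?_
  show PySem.List.sorted _ _ false = _
  rw [hfin.1]
  unfold pvBucketA
  rw [hslk]
  congr 1
  refine List.filter_congr (fun p hp => ?_)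
  rw [hfin.2 p]

lemma pvIte_insert (c : Prop) [Decidable c] (res : PySem.Dict String (List String)) (k : String)
    (v1 v2 : List String) :
    (if c then res.insert k v1 else res.insert k v2) = res.insert k (if c then v1 else v2) := by
  split_ifs <;> rfl

lemma pvMapGetD' (l : List (List String)) (f : List String → PySem.Set String) (n : Nat)
    (h : n < l.length) :
    (l.map f).getD n [] = f (l.getD n []) := by
  rw [List.getD_eq_getElem _ _ (by simpa using h), List.getD_eq_getElem _ _ h, List.getElem_map]

lemma pvScanSets_eq (sl : List (List String)) (h : sl ≠ []) :
    pvSS sl 0 :: pvTailSets sl = sl.map (fun x => PySem.Set.ofList x) := by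
  cases sl with
  | nil => exact absurd rfl h
  | cons a t => rfl

lemma pvNP_branch (sl : List (List String)) (i : Nat) (h1 : 1 ≤ i)
    (hi : ((i : Nat) : Int) < (sl.length : Int)) :
    PySem.List.sorted (PySem.Set.diff
        (PySem.List.pyGetD (sl.map (fun x => PySem.Set.ofList x)) ((i : Nat) : Int) [])
        (PySem.List.pyGetD (pvPus (pvSS sl 0) ((pvTailSets sl).take 7)) (((i : Nat) : Int) - 1) []))
      (fun x => x) false =
    PySem.List.sorted (pvNP sl i) (fun x => x) false := by
  have hiN : i < sl.length := by exact_mod_cast hi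
  have h1' : (((i : Nat) : Int) - 1) = ((i - 1 : Nat) : Int) := by omega
  rw [PySem.List.pyGetD_natCast, h1', PySem.List.pyGetD_natCast]
  unfold pvNP pvSS
  rw [pvMapGetD' sl _ i hiN]

set_option maxHeartbeats 1600000 in
lemma pvB_eq (data : List (Int × List String)) (hne : data ≠ [])
    (hnd : (data.map Prod.fst).Nodup) :
    lp_process_alt data =
      [("first_time", PySem.List.sorted (pvFT (pvSl data)) (fun x => x) false),
       ("not_present_in_1", if (1 : Int) < ((pvSl data).length : Int) then PySem.List.sorted (pvNP (pvSl data) 1) (fun x => x) false else []),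
       ("not_present_in_2", if (2 : Int) < ((pvSl data).length : Int) then PySem.List.sorted (pvNP (pvSl data) 2) (fun x => x) false else []),
       ("not_present_in_3", if (3 : Int) < ((pvSl data).length : Int) then PySem.List.sorted (pvNP (pvSl data) 3) (fun x => x) false else []),
       ("not_present_in_4", if (4 : Int) < ((pvSl data).length : Int) then PySem.List.sorted (pvNP (pvSl data) 4) (fun x => x) false else []),
       ("not_present_in_5", if (5 : Int) < ((pvSl data).length : Int) then PySem.List.sorted (pvNP (pvSl data) 5) (fun x => x) false else []),
       ("not_present_in_6", if (6 : Int) < ((pvSl data).length : Int) then PySem.List.sorted (pvNP (pvSl data) 6) (fun x => x) false else []),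
       ("not_present_in_7", if (7 : Int) < ((pvSl data).length : Int) then PySem.List.sorted (pvNP (pvSl data) 7) (fun x => x) false else []),
       ("present_in_all", PySem.List.sorted (pvIA (pvSl data)) (fun x => x) false)] := by
  simp only [lp_process_alt]
  set d := PySem.Dict.mk data with hd
  set keys := PySem.List.sorted d.keys (fun x => x) false with hkeys
  have hdk : d.keys = data.map Prod.fst := rfl
  have hknd : keys.Nodup :=
    ((PySem.List.sorted_perm d.keys (fun x => x) false).nodup_iff).2 (by rw [hdk]; exact hnd)
  have hkle : keys.Pairwise (fun a b => a ≤ b) := PySem.List.sorted_pairwise _ _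
  have hklt : keys.Pairwise (· < ·) :=
    (hkle.and hknd).imp (fun hab => lt_of_le_of_ne hab.1 hab.2)
  have hkne : keys ≠ [] := by
    rw [hkeys, Ne, PySem.List.sorted_eq_nil_iff, hdk]
    simpa using hne
  have hK1 : 1 ≤ keys.length := List.length_pos_of_ne_nil hkne
  have hslr : pvSl data = keys.reverse.map (fun k => d.getD k []) := rfl
  have hslk : (pvSl data).length = keys.length := by rw [hslr]; simp
  have hslne : pvSl data ≠ [] := by
    intro hc
    rw [hc] at hslk
    simp at hslk
    omega
  have hdesc : PySem.List.sorted d.keys (fun x => x) true = keys.reverse :=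
    PySem.List.sorted_rev_eq_of_perm_of_pairwise_gt _ _ _
      (keys.reverse_perm.trans (PySem.List.sorted_perm _ _ _))
      (List.pairwise_reverse.2 hklt)
  rw [hdesc, PySem.List.pyGetD_zero, PySem.List.slice_from_one]
  have hs0 : (pvSl data).getD 0 [] = d.getD (keys.reverse.getD 0 0) [] := by
    rw [hslr]
    rw [List.getD_eq_getElem _ _ (by simpa using hK1),
      List.getD_eq_getElem _ _ (by simpa using hK1 : 0 < keys.reverse.length), List.getElem_map]
  rw [show PySem.Set.ofList (d.getD (keys.reverse.getD 0 0) []) = pvSS (pvSl data) 0 from by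
    unfold pvSS; rw [hs0]]
  have hrest : keys.reverse.tail.map (fun k => PySem.Set.ofList (d.getD k [])) = pvTailSets (pvSl data) := by
    unfold pvTailSets
    rw [hslr, ← List.map_tail, List.map_map]
    rfl
  rw [hrest]
  rw [show (pvTailSets (pvSl data)).foldl PySem.Set.inter (pvSS (pvSl data) 0) = pvIA (pvSl data) from rfl]
  rw [show (pvTailSets (pvSl data)).foldl PySem.Set.diff
      (PySem.Set.diff (pvSS (pvSl data) 0) (pvIA (pvSl data))) = pvFT (pvSl data) from rfl]
  have hof : PySem.Set.ofList (pvSS (pvSl data) 0) = pvSS (pvSl data) 0 := by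
    unfold pvSS
    exact PySem.Set.ofList_ofList _
  rw [show PySem.List.slice (pvTailSets (pvSl data)) none (some 7) =
      (pvTailSets (pvSl data)).take 7 from by
    rw [PySem.List.slice_to _ (by norm_num)]
    simp]
  rw [hof,
    show [pvSS (pvSl data) 0] = ([] : List (PySem.Set String)) ++ [pvSS (pvSl data) 0] from rfl,
    pvPusFold, List.nil_append]
  rw [pvScanSets_eq _ hslne]
  rw [show (((pvSl data).map (fun x => PySem.Set.ofList x)).length : Int) = ((pvSl data).length : Int)
    from by simp]
  rw [show PySem.List.pyRange 1 8 1 = [(1 : Int), 2, 3, 4, 5, 6, 7] from by decide]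
  simp only [List.foldl_cons, List.foldl_nil]
  simp only [pvIte_insert]
  rw [show "not_present_in_" ++ PySem.Int.toStr 1 = "not_present_in_1" from by decide,
    show "not_present_in_" ++ PySem.Int.toStr 2 = "not_present_in_2" from by decide,
    show "not_present_in_" ++ PySem.Int.toStr 3 = "not_present_in_3" from by decide,
    show "not_present_in_" ++ PySem.Int.toStr 4 = "not_present_in_4" from by decide,
    show "not_present_in_" ++ PySem.Int.toStr 5 = "not_present_in_5" from by decide,
    show "not_present_in_" ++ PySem.Int.toStr 6 = "not_present_in_6" from by decide,
    show "not_present_in_" ++ PySem.Int.toStr 7 = "not_present_in_7" from by decide]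
  rw [PySem.Dict.items_insert_of_not_contains _ _ (by
    simp only [PySem.Dict.contains_insert, PySem.Dict.contains_empty]; decide)]
  rw [PySem.Dict.items_insert_of_not_contains _ _ (by
    simp only [PySem.Dict.contains_insert, PySem.Dict.contains_empty]; decide)]
  rw [PySem.Dict.items_insert_of_not_contains _ _ (by
    simp only [PySem.Dict.contains_insert, PySem.Dict.contains_empty]; decide)]
  rw [PySem.Dict.items_insert_of_not_contains _ _ (by
    simp only [PySem.Dict.contains_insert, PySem.Dict.contains_empty]; decide)]
  rw [PySem.Dict.items_insert_of_not_contains _ _ (by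
    simp only [PySem.Dict.contains_insert, PySem.Dict.contains_empty]; decide)]
  rw [PySem.Dict.items_insert_of_not_contains _ _ (by
    simp only [PySem.Dict.contains_insert, PySem.Dict.contains_empty]; decide)]
  rw [PySem.Dict.items_insert_of_not_contains _ _ (by
    simp only [PySem.Dict.contains_insert, PySem.Dict.contains_empty]; decide)]
  rw [PySem.Dict.items_insert_of_not_contains _ _ (by
    simp only [PySem.Dict.contains_insert, PySem.Dict.contains_empty]; decide)]
  rw [show (PySem.Dict.empty.insert "first_time"
      (PySem.List.sorted (pvFT (pvSl data)) (fun x => x) false)).items =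
    [("first_time", PySem.List.sorted (pvFT (pvSl data)) (fun x => x) false)] from rfl]
  simp only [List.cons_append, List.nil_append]
  refine (List.cons_eq_cons).2 ⟨rfl, ?_⟩
  refine (List.cons_eq_cons).2 ⟨?_, ?_⟩
  · refine Prod.ext rfl ?_
    show _ = if (1 : Int) < ((pvSl data).length : Int) then _ else _
    by_cases hi : (1 : Int) < ((pvSl data).length : Int)
    · rw [if_pos hi, if_pos hi]
      exact pvNP_branch (pvSl data) 1 (by norm_num) (by exact_mod_cast hi)
    · rw [if_neg hi, if_neg hi]
  refine (List.cons_eq_cons).2 ⟨?_, ?_⟩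
  · refine Prod.ext rfl ?_
    show _ = if (2 : Int) < ((pvSl data).length : Int) then _ else _
    by_cases hi : (2 : Int) < ((pvSl data).length : Int)
    · rw [if_pos hi, if_pos hi]
      exact pvNP_branch (pvSl data) 2 (by norm_num) (by exact_mod_cast hi)
    · rw [if_neg hi, if_neg hi]
  refine (List.cons_eq_cons).2 ⟨?_, ?_⟩
  · refine Prod.ext rfl ?_
    show _ = if (3 : Int) < ((pvSl data).length : Int) then _ else _
    by_cases hi : (3 : Int) < ((pvSl data).length : Int)
    · rw [if_pos hi, if_pos hi]
      exact pvNP_branch (pvSl data) 3 (by norm_num) (by exact_mod_cast hi)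
    · rw [if_neg hi, if_neg hi]
  refine (List.cons_eq_cons).2 ⟨?_, ?_⟩
  · refine Prod.ext rfl ?_
    show _ = if (4 : Int) < ((pvSl data).length : Int) then _ else _
    by_cases hi : (4 : Int) < ((pvSl data).length : Int)
    · rw [if_pos hi, if_pos hi]
      exact pvNP_branch (pvSl data) 4 (by norm_num) (by exact_mod_cast hi)
    · rw [if_neg hi, if_neg hi]
  refine (List.cons_eq_cons).2 ⟨?_, ?_⟩
  · refine Prod.ext rfl ?_
    show _ = if (5 : Int) < ((pvSl data).length : Int) then _ else _
    by_cases hi : (5 : Int) < ((pvSl data).length : Int)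
    · rw [if_pos hi, if_pos hi]
      exact pvNP_branch (pvSl data) 5 (by norm_num) (by exact_mod_cast hi)
    · rw [if_neg hi, if_neg hi]
  refine (List.cons_eq_cons).2 ⟨?_, ?_⟩
  · refine Prod.ext rfl ?_
    show _ = if (6 : Int) < ((pvSl data).length : Int) then _ else _
    by_cases hi : (6 : Int) < ((pvSl data).length : Int)
    · rw [if_pos hi, if_pos hi]
      exact pvNP_branch (pvSl data) 6 (by norm_num) (by exact_mod_cast hi)
    · rw [if_neg hi, if_neg hi]
  refine (List.cons_eq_cons).2 ⟨?_, ?_⟩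
  · refine Prod.ext rfl ?_
    show _ = if (7 : Int) < ((pvSl data).length : Int) then _ else _
    by_cases hi : (7 : Int) < ((pvSl data).length : Int)
    · rw [if_pos hi, if_pos hi]
      exact pvNP_branch (pvSl data) 7 (by norm_num) (by exact_mod_cast hi)
    · rw [if_neg hi, if_neg hi]
  rfl

lemma pvLen1_iff (lst : List Int) : (lst.length = 1 ∧ (1 : Int) ∈ lst) ↔ lst = [1] := by
  constructor
  · rintro ⟨hl, hm⟩
    obtain ⟨a, rfl⟩ := List.length_eq_one_iff.1 hl
    rw [List.mem_singleton] at hm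
    rw [← hm]
  · rintro rfl
    simp

lemma pvHead_imp (sl : List (List String)) (p : String) (hK : 1 ≤ sl.length) (i : Nat)
    (h1 : 1 ≤ i)
    (hh : (pvScansUpTo sl p sl.length).head? = some ((i : Int) + 1)) :
    ¬ ((pvScansUpTo sl p sl.length).length = sl.length) ∧
    ¬ ((pvScansUpTo sl p sl.length).length = 1 ∧ (1 : Int) ∈ pvScansUpTo sl p sl.length) := by
  obtain ⟨hit, hpi, hmin⟩ := (pvHeadSucc_iff sl p sl.length i).1 hh
  have h0 : p ∉ sl.getD 0 [] := hmin 0 (by omega)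
  constructor
  · intro hc
    exact h0 ((pvLen_iff sl p _).1 hc 0 (by omega))
  · rintro ⟨-, hm1⟩
    rw [mem_pvScansUpTo] at hm1
    obtain ⟨j, hj, hje, hp⟩ := hm1
    have : j = 0 := by omega
    subst this
    exact h0 hp

lemma pvClassA_pia (sl : List (List String)) (p : String) :
    pvClassify sl.length (pvScansUpTo sl p sl.length) = some "present_in_all" ↔
      ∀ j < sl.length, p ∈ sl.getD j [] := by
  rw [pvClassify_spec _ _ (pairwise_lt_pvScansUpTo sl p _), ← pvLen_iff]
  by_cases h1 : (pvScansUpTo sl p sl.length).length = sl.length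
  · simp [h1]
  · rw [if_neg h1]
    constructor
    · intro h
      split_ifs at h <;> simp_all
    · intro h
      exact absurd h h1

lemma pvClassA_ft (sl : List (List String)) (p : String) (hK : 1 ≤ sl.length) :
    pvClassify sl.length (pvScansUpTo sl p sl.length) = some "first_time" ↔
      (¬ (∀ j < sl.length, p ∈ sl.getD j []) ∧ p ∈ sl.getD 0 [] ∧
        ∀ j, 1 ≤ j → j < sl.length → p ∉ sl.getD j []) := by
  rw [pvClassify_spec _ _ (pairwise_lt_pvScansUpTo sl p _)]
  by_cases h1 : (pvScansUpTo sl p sl.length).length = sl.length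
  · rw [if_pos h1]
    constructor
    · intro h; simp at h
    · rintro ⟨hc, -⟩
      exact absurd ((pvLen_iff sl p _).1 h1) hc
  · rw [if_neg h1]
    by_cases h2 : (pvScansUpTo sl p sl.length).length = 1 ∧ (1 : Int) ∈ pvScansUpTo sl p sl.length
    · rw [if_pos h2]
      have hs := (pvSingleton_iff sl p _ hK).1 ((pvLen1_iff _).1 h2)
      constructor
      · intro _
        exact ⟨fun hall => h1 ((pvLen_iff sl p _).2 hall), hs.1, hs.2⟩
      · intro _
        rfl
    · rw [if_neg h2]
      constructor
      · intro h
        split_ifs at h <;> simp_all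
      · rintro ⟨-, h0, hrest⟩
        exact absurd ((pvLen1_iff _).2 ((pvSingleton_iff sl p _ hK).2 ⟨h0, hrest⟩)) h2

lemma pvClassA_np (sl : List (List String)) (p : String) (hK : 1 ≤ sl.length) (i : Nat)
    (h1 : 1 ≤ i) (h7 : i ≤ 7) :
    pvClassify sl.length (pvScansUpTo sl p sl.length) = some (pvL9.getD i "") ↔
      (i < sl.length ∧ p ∈ sl.getD i [] ∧ ∀ j < i, p ∉ sl.getD j []) := by
  rw [← pvHeadSucc_iff sl p sl.length i,
    pvClassify_spec _ _ (pairwise_lt_pvScansUpTo sl p _)]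
  constructor
  · intro h
    split_ifs at h with hc1 hc2 hh2 hh3 hh4 hh5 hh6 hh7 hh8 <;>
      (interval_cases i <;> simp_all [pvL9])
  · intro hh
    obtain ⟨hn1, hn2⟩ := pvHead_imp sl p hK i h1 hh
    rw [if_neg hn1, if_neg hn2]
    interval_cases i <;> simp_all [pvL9]

lemma mem_pvBucketA (sl : List (List String)) (c : String) (p : String) :
    p ∈ pvBucketA sl c ↔
      p ∈ pvPlatesUpTo sl sl.length ∧
        pvClassify sl.length (pvScansUpTo sl p sl.length) = some c := by
  unfold pvBucketA
  rw [List.mem_filter]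
  simp [beq_iff_eq]

lemma mem_pvIA (sl : List (List String)) (p : String) (hK : 1 ≤ sl.length) :
    p ∈ pvIA sl ↔ ∀ j < sl.length, p ∈ sl.getD j [] := by
  unfold pvIA pvTailSets
  rw [pvMem_foldl_inter]
  unfold pvSS
  rw [PySem.Set.mem_ofList]
  constructor
  · rintro ⟨h0, ht⟩ j hj
    cases j with
    | zero => exact h0
    | succ j =>
      have := (pvForall_tail_iff sl (fun x => p ∈ PySem.Set.ofList x)).1
        (fun x hx => ht _ (List.mem_map_of_mem hx)) (j + 1) (by omega) hj
      rwa [PySem.Set.mem_ofList] at this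
  · intro h
    refine ⟨h 0 (by omega), ?_⟩
    have hall : ∀ x ∈ sl.tail, p ∈ PySem.Set.ofList x :=
      (pvForall_tail_iff sl (fun x => p ∈ PySem.Set.ofList x)).2
        (fun j hj1 hj2 => (PySem.Set.mem_ofList _ _).2 (h j hj2))
    intro t ht
    obtain ⟨x, hx, rfl⟩ := List.mem_map.1 ht
    exact hall x hx

lemma nodup_pvIA (sl : List (List String)) : (pvIA sl).Nodup :=
  pvNodup_foldl_inter _ _ (PySem.Set.nodup_ofList _)

lemma mem_pvFT (sl : List (List String)) (p : String) (hK : 1 ≤ sl.length) :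
    p ∈ pvFT sl ↔
      (p ∈ sl.getD 0 [] ∧ p ∉ pvIA sl ∧ ∀ j, 1 ≤ j → j < sl.length → p ∉ sl.getD j []) := by
  unfold pvFT pvTailSets
  rw [pvMem_foldl_diff, PySem.Set.mem_diff]
  unfold pvSS
  rw [PySem.Set.mem_ofList]
  constructor
  · rintro ⟨⟨h0, hia⟩, ht⟩
    refine ⟨h0, hia, ?_⟩
    intro j hj1 hj2 hp
    have := (pvForall_tail_iff sl (fun x => p ∉ PySem.Set.ofList x)).1
      (fun x hx => ht _ (List.mem_map_of_mem hx)) j hj1 hj2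
    exact this ((PySem.Set.mem_ofList _ _).2 hp)
  · rintro ⟨h0, hia, hrest⟩
    refine ⟨⟨h0, hia⟩, ?_⟩
    have hall : ∀ x ∈ sl.tail, p ∉ PySem.Set.ofList x :=
      (pvForall_tail_iff sl (fun x => p ∉ PySem.Set.ofList x)).2
        (fun j hj1 hj2 hc => hrest j hj1 hj2 ((PySem.Set.mem_ofList _ _).1 hc))
    intro t ht
    obtain ⟨x, hx, rfl⟩ := List.mem_map.1 ht
    exact hall x hx

lemma nodup_pvFT (sl : List (List String)) : (pvFT sl).Nodup :=
  pvNodup_foldl_diff _ _ (PySem.Set.nodup_diff _ _ (PySem.Set.nodup_ofList _))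

lemma mem_pvNP (sl : List (List String)) (p : String) (i : Nat) (h1 : 1 ≤ i) (h7 : i ≤ 7)
    (hi : i < sl.length) :
    p ∈ pvNP sl i ↔ (p ∈ sl.getD i [] ∧ ∀ j < i, p ∉ sl.getD j []) := by
  unfold pvNP pvSS pvTailSets
  rw [PySem.Set.mem_diff]
  have hts : ((sl.tail.map (fun x => PySem.Set.ofList x)).take 7).length =
      min 7 (sl.length - 1) := by simp
  rw [pvPus_getD_mem _ _ _ (by omega) p, List.take_take,
    Nat.min_eq_left (by omega : i - 1 ≤ 7),
    PySem.Set.mem_ofList, PySem.Set.mem_ofList, ← List.map_take]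
  constructor
  · rintro ⟨hp, hn⟩
    refine ⟨hp, ?_⟩
    intro j hj hpj
    refine hn ?_
    cases j with
    | zero => exact Or.inl hpj
    | succ j =>
      refine Or.inr ⟨PySem.Set.ofList (sl.tail[j]'(by rw [List.length_tail]; omega)),
        List.mem_map_of_mem (List.mem_take_iff_getElem.2
          ⟨j, by rw [List.length_tail]; omega, rfl⟩), ?_⟩
      rw [PySem.Set.mem_ofList, List.getElem_tail]
      rwa [List.getD_eq_getElem _ _ (by omega)] at hpj
  · rintro ⟨hp, hj⟩
    refine ⟨hp, ?_⟩
    rintro (h0 | ⟨t, ht, hpt⟩)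
    · exact hj 0 (by omega) h0
    · rw [List.mem_map] at ht
      obtain ⟨x, hx, rfl⟩ := ht
      obtain ⟨k, hk, hge⟩ := List.mem_take_iff_getElem.1 hx
      rw [List.length_tail] at hk
      rw [PySem.Set.mem_ofList, ← hge, List.getElem_tail] at hpt
      refine hj (k + 1) (by omega) ?_
      rwa [List.getD_eq_getElem _ _ (by omega)]

lemma nodup_pvNP (sl : List (List String)) (i : Nat) : (pvNP sl i).Nodup :=
  PySem.Set.nodup_diff _ _ (PySem.Set.nodup_ofList _)

lemma pvSorted_eq_of_mem_iff {xs ys : List String} (hx : xs.Nodup) (hy : ys.Nodup)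
    (h : ∀ a, a ∈ xs ↔ a ∈ ys) :
    PySem.List.sorted xs (fun x => x) false = PySem.List.sorted ys (fun x => x) false :=
  PySem.List.sorted_eq_sorted_of_perm xs ys _ (fun _ _ hab => hab)
    ((List.perm_ext_iff_of_nodup hx hy).2 h)

lemma nodup_pvBucketA (sl : List (List String)) (c : String) : (pvBucketA sl c).Nodup :=
  (nodup_pvPlatesUpTo sl _).filter _

lemma pvEq_ft (sl : List (List String)) (hK : 1 ≤ sl.length) :
    PySem.List.sorted (pvBucketA sl "first_time") (fun x => x) false =
      PySem.List.sorted (pvFT sl) (fun x => x) false := by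
  refine pvSorted_eq_of_mem_iff (nodup_pvBucketA sl _) (nodup_pvFT sl) (fun p => ?_)
  rw [mem_pvBucketA, pvClassA_ft sl p hK, mem_pvFT sl p hK, mem_pvPlatesUpTo]
  constructor
  · rintro ⟨-, hn, h0, hr⟩
    exact ⟨h0, fun hc => hn ((mem_pvIA sl p hK).1 hc), hr⟩
  · rintro ⟨h0, hn, hr⟩
    exact ⟨⟨0, by omega, h0⟩, fun hc => hn ((mem_pvIA sl p hK).2 hc), h0, hr⟩

lemma pvEq_pia (sl : List (List String)) (hK : 1 ≤ sl.length) :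
    PySem.List.sorted (pvBucketA sl "present_in_all") (fun x => x) false =
      PySem.List.sorted (pvIA sl) (fun x => x) false := by
  refine pvSorted_eq_of_mem_iff (nodup_pvBucketA sl _) (nodup_pvIA sl) (fun p => ?_)
  rw [mem_pvBucketA, pvClassA_pia sl p, mem_pvPlatesUpTo, mem_pvIA sl p hK]
  constructor
  · rintro ⟨-, h⟩
    exact h
  · intro h
    exact ⟨⟨0, by omega, h 0 (by omega)⟩, h⟩

lemma pvEq_np (sl : List (List String)) (hK : 1 ≤ sl.length) (i : Nat) (h1 : 1 ≤ i)
    (h7 : i ≤ 7) :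
    PySem.List.sorted (pvBucketA sl (pvL9.getD i "")) (fun x => x) false =
      if ((i : Nat) : Int) < (sl.length : Int) then
        PySem.List.sorted (pvNP sl i) (fun x => x) false
      else [] := by
  by_cases hi : i < sl.length
  · rw [if_pos (by exact_mod_cast hi)]
    refine pvSorted_eq_of_mem_iff (nodup_pvBucketA sl _) (nodup_pvNP sl i) (fun p => ?_)
    rw [mem_pvBucketA, pvClassA_np sl p hK i h1 h7, mem_pvNP sl p i h1 h7 hi, mem_pvPlatesUpTo]
    constructor
    · rintro ⟨-, -, hp, hr⟩
      exact ⟨hp, hr⟩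
    · rintro ⟨hp, hr⟩
      exact ⟨⟨i, hi, hp⟩, hi, hp, hr⟩
  · rw [if_neg (by exact_mod_cast hi)]
    have hb : pvBucketA sl (pvL9.getD i "") = [] := by
      unfold pvBucketA
      rw [List.filter_eq_nil_iff]
      intro p hp hc
      rw [beq_iff_eq] at hc
      exact hi ((pvClassA_np sl p hK i h1 h7).1 hc).1
    rw [hb]
    rfl

lemma pvMain (sl : List (List String)) (hK : 1 ≤ sl.length) :
    pvL9.map (fun c => (c, PySem.List.sorted (pvBucketA sl c) (fun x => x) false)) =
      [("first_time", PySem.List.sorted (pvFT sl) (fun x => x) false),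
       ("not_present_in_1", if (1 : Int) < (sl.length : Int) then PySem.List.sorted (pvNP sl 1) (fun x => x) false else []),
       ("not_present_in_2", if (2 : Int) < (sl.length : Int) then PySem.List.sorted (pvNP sl 2) (fun x => x) false else []),
       ("not_present_in_3", if (3 : Int) < (sl.length : Int) then PySem.List.sorted (pvNP sl 3) (fun x => x) false else []),
       ("not_present_in_4", if (4 : Int) < (sl.length : Int) then PySem.List.sorted (pvNP sl 4) (fun x => x) false else []),
       ("not_present_in_5", if (5 : Int) < (sl.length : Int) then PySem.List.sorted (pvNP sl 5) (fun x => x) false else []),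
       ("not_present_in_6", if (6 : Int) < (sl.length : Int) then PySem.List.sorted (pvNP sl 6) (fun x => x) false else []),
       ("not_present_in_7", if (7 : Int) < (sl.length : Int) then PySem.List.sorted (pvNP sl 7) (fun x => x) false else []),
       ("present_in_all", PySem.List.sorted (pvIA sl) (fun x => x) false)] := by
  simp only [pvL9, List.map]
  refine (List.cons_eq_cons).2 ⟨Prod.ext rfl (pvEq_ft sl hK), ?_⟩
  refine (List.cons_eq_cons).2 ⟨Prod.ext rfl (pvEq_np sl hK 1 (by norm_num) (by norm_num)), ?_⟩
  refine (List.cons_eq_cons).2 ⟨Prod.ext rfl (pvEq_np sl hK 2 (by norm_num) (by norm_num)), ?_⟩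
  refine (List.cons_eq_cons).2 ⟨Prod.ext rfl (pvEq_np sl hK 3 (by norm_num) (by norm_num)), ?_⟩
  refine (List.cons_eq_cons).2 ⟨Prod.ext rfl (pvEq_np sl hK 4 (by norm_num) (by norm_num)), ?_⟩
  refine (List.cons_eq_cons).2 ⟨Prod.ext rfl (pvEq_np sl hK 5 (by norm_num) (by norm_num)), ?_⟩
  refine (List.cons_eq_cons).2 ⟨Prod.ext rfl (pvEq_np sl hK 6 (by norm_num) (by norm_num)), ?_⟩
  refine (List.cons_eq_cons).2 ⟨Prod.ext rfl (pvEq_np sl hK 7 (by norm_num) (by norm_num)), ?_⟩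
  refine (List.cons_eq_cons).2 ⟨Prod.ext rfl (pvEq_pia sl hK), rfl⟩

-- ===== VERDICT (by name: the statement is the Claim_ definition above) =====
theorem lp_process_spec : Claim_equal_lp_process := by
  intro data hdom hpre
  obtain ⟨hne, hnd⟩ := hpre
  show lp_process data = lp_process_alt data
  have hkne : PySem.List.sorted (PySem.Dict.mk data).keys (fun x => x) false ≠ [] := by
    rw [Ne, PySem.List.sorted_eq_nil_iff]
    intro hc
    exact hne (by simpa using (hc : (data.map Prod.fst) = []))
  have hK : 1 ≤ (pvSl data).length := by
    rw [pvSl_length]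
    exact List.length_pos_of_ne_nil hkne
  rw [pvA_eq data hne hnd, pvB_eq data hne hnd]
  exact pvMain (pvSl data) hK
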